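-- pv_equiv track=rewrite | github.com/yjs03057/Algorithm-Study | programmers/지형이동.py | solution
-- ===== SOURCE A (Python) =====
-- from collections import deque, defaultdict
-- import math
--
-- def find_root(x, root):
--     if x == root[x]: return x
--     else:
--         r = find_root(root[x], root)
--         root[x] = r
--         return r
--
-- def union_find(x, y, root):
--     x_root = find_root(x, root)
--     y_root = find_root(y, root)
--     root[y_root] = x_root
--
-- def BFS(land, height, check, loc, group, N):
--     direction = [(0, -1), (0, 1), (1, 0), (-1, 0)]
--     q = deque()
--     q.append(loc)
--     check[loc[0]][loc[1]] = group
--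
--     while q:
--         x, y = q.popleft()
--         for dx, dy in direction:
--             nx, ny = x + dx, y + dy
--             if nx < 0 or nx >= N or ny < 0 or ny >= N or check[nx][ny]: continue
--             if abs(land[nx][ny] - land[x][y]) <= height:
--                 q.append([nx, ny])
--                 check[nx][ny] = group
--
-- def find_ladder(check, land, N):
--     direction = [(0, -1), (0, 1), (1, 0), (-1, 0)]
--     ladders = defaultdict(lambda: math.inf)
--
--     for i in range(N):
--         for j in range(N):
--             current = check[i][j]
--             for dx, dy in direction:
--                 nx, ny = i + dx, j + dy
--                 if nx < 0 or nx >= N or ny < 0 or ny >= N or check[nx][ny] == current: continue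
--                 dist = abs(land[i][j] - land[nx][ny])
--                 ladders[(current, check[nx][ny])] = min(dist, ladders[(current, check[nx][ny])])
--     return ladders
--
-- def kruskal(ladders, group):
--     sum = 0
--     roots = {_:_ for _ in range(1, group)}
--     for (x, y), value in ladders:
--        if find_root(x, roots) != find_root(y, roots):
--            union_find(x, y, roots)
--            sum += value
--        if len(roots.items()) == 1: return sum
--     return sum
--
-- def solution(land, height):
--     answer = 0
--     N = len(land)
--     check = [[0 for _ in range(N)] for _ in range(N)]
--
--     group = 1
--     for i in range(N):
--         for j in range(N):
--             if not check[i][j]: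
--                 BFS(land, height, check, [i, j], group, N)
--                 group += 1
--
--     ladders = find_ladder(check, land, N)
--     ladders = sorted(ladders.items(),key=lambda x:x[1])
--
--     answer = kruskal(ladders, group)
--     return answer
-- ===== SOURCE B (Python) =====
-- def solution(land, height):
--     sz = len(land)
--     dirs = ((0, -1), (0, 1), (1, 0), (-1, 0))
--
--     # phase 1: label the free-movement regions on a flat length-sz*sz list,
--     # collect-then-mark stack DFS (the four neighbours of a cell are distinct,
--     # so collecting them from the unmarked state before marking is sound)
--     label = [0] * (sz * sz)
--     groups = 0
--     for idx in range(sz * sz):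
--         if label[idx] == 0:
--             groups += 1
--             label[idx] = groups
--             stack = [divmod(idx, sz)]
--             while stack:
--                 ri, ci = stack.pop()
--                 cand = [(ri + dr, ci + dc) for dr, dc in dirs
--                         if 0 <= ri + dr < sz and 0 <= ci + dc < sz
--                         and label[(ri + dr) * sz + (ci + dc)] == 0
--                         and abs(land[ri + dr][ci + dc] - land[ri][ci]) <= height]
--                 for nr, nc in cand:
--                     label[nr * sz + nc] = groups
--                 stack += cand
--
--     # phase 2: cheapest ladder between each ordered pair of adjacent regions
--     best = {}
--     for idx in range(sz * sz):
--         grp = label[idx]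
--         ri, ci = divmod(idx, sz)
--         for key, w in [((grp, label[(ri + dr) * sz + (ci + dc)]),
--                         abs(land[ri][ci] - land[ri + dr][ci + dc]))
--                        for dr, dc in dirs
--                        if 0 <= ri + dr < sz and 0 <= ci + dc < sz
--                        and label[(ri + dr) * sz + (ci + dc)] != grp]:
--             if key not in best or w < best[key]:
--                 best[key] = w
--
--     # phase 3: Kruskal with a flat component list, relabelling a whole
--     # component on each merge (no parent forest, no recursion)
--     comp = list(range(groups + 1))
--     total = 0
--     for (a, b), w in sorted(best.items(), key=lambda ed: ed[1]):
--         ca, cb = comp[a], comp[b]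
--         if ca != cb:
--             total += w
--             comp = [ca if lbl == cb else lbl for lbl in comp]
--     return total
-- ===== Notes on version B (the rewrite author's own statement) =====
-- stated objective: alternative
-- what changed: B works on a flat length-N*N label list scanned by a single k-loop with divmod instead of A's nested-index N*N check matrix: regions are labeled by a collect-then-mark stack DFS (a filtered comprehension of all four unmarked in-reach neighbours, marked in one batch) instead of A's one-at-a-time deque BFS, the cheapest-ladder table is a plain dict filled by conditional overwrite from per-cell edge comprehensions instead of A's defaultdict(math.inf) min-fold, and Kruskal uses a flat component list relabelled wholesale on each merge instead of A's recursive path-compressing union-find dict.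
import Mathlib
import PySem

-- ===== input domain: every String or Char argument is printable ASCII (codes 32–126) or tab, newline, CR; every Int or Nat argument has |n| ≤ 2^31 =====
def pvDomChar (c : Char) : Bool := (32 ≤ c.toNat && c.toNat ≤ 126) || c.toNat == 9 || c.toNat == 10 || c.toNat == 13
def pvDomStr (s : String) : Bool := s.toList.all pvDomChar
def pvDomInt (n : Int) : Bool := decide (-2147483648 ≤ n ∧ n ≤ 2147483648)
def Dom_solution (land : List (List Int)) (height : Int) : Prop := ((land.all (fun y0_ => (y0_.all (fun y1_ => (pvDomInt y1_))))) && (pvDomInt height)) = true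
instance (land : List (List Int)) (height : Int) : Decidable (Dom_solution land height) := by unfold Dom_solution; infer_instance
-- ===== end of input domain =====

-- B drops the matrix-shaped bookkeeping: it labels the free-movement regions on a FLAT length-N*N
-- list with a collect-then-mark stack DFS, gathers each cell's inter-region edges as a filtered
-- list folded into a cheapest-edge table, and runs Kruskal with a flat relabel-on-merge component
-- list instead of A's recursive path-compressing union-find (objective: alternative; equivalence
-- of the RETURN value).

-- ===== PORT A =====

-- m[i][j] as both programs read it (indices are in range wherever the programs read; Pre_ covers land's rows)
def pvGet2 (m : List (List Int)) (i j : Int) : Int :=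
  PySem.List.pyGetD (PySem.List.pyGetD m i []) j 0

-- m[i][j] = v (indices are in range wherever the programs write)
def pvSet2 (m : List (List Int)) (i j : Int) (v : Int) : List (List Int) :=
  PySem.List.pySetD m i (PySem.List.pySetD (PySem.List.pyGetD m i []) j v)

-- one neighbour test of BFS's inner 'for dx, dy in direction' (the two-step continue/if shape of A)
def bfsStep (land : List (List Int)) (height N g x y : Int)
    (s : List (List Int) × List (Int × Int)) (d : Int × Int) :
    List (List Int) × List (Int × Int) :=
  let nx := x + d.1
  let ny := y + d.2
  if nx < 0 ∨ N ≤ nx ∨ ny < 0 ∨ N ≤ ny ∨ pvGet2 s.1 nx ny ≠ 0 then s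
  else if |pvGet2 land nx ny - pvGet2 land x y| ≤ height then
    (pvSet2 s.1 nx ny g, s.2 ++ [(nx, ny)])
  else s

-- 'while q:' of BFS; the fuel N*N+1 bounds the number of pops (every queued cell was freshly marked)
def bfsLoop (land : List (List Int)) (height N g : Int) :
    Nat → List (List Int) → List (Int × Int) → List (List Int)
  | 0, check, _ => check
  | _ + 1, check, [] => check
  | fuel + 1, check, c :: rest =>
    let s := [((0 : Int), (-1 : Int)), (0, 1), (1, 0), (-1, 0)].foldl
        (bfsStep land height N g c.1 c.2) (check, rest)
    bfsLoop land height N g fuel s.1 s.2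

def BFS (land : List (List Int)) (height : Int) (check : List (List Int))
    (loc : Int × Int) (group N : Int) : List (List Int) :=
  bfsLoop land height N group (land.length * land.length + 1)
    (pvSet2 check loc.1 loc.2 group) [loc]

-- find_ladder's inner 'for dx, dy in direction' body
def ladderStep (check land : List (List Int)) (N i j current : Int)
    (lad : PySem.Dict (Int × Int) Int) (d : Int × Int) : PySem.Dict (Int × Int) Int :=
  let nx := i + d.1
  let ny := j + d.2
  if nx < 0 ∨ N ≤ nx ∨ ny < 0 ∨ N ≤ ny ∨ pvGet2 check nx ny = current then lad
  else
    let dist := |pvGet2 land i j - pvGet2 land nx ny|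
    -- defaultdict(lambda: math.inf): the read inserts the default, min(dist, inf) = dist replaces it;
    -- net effect: absent key ↦ dist, present value v ↦ min(dist, v) (Python min keeps the first on ties)
    match lad.get? (current, pvGet2 check nx ny) with
    | none => lad.insert (current, pvGet2 check nx ny) dist
    | some v => lad.insert (current, pvGet2 check nx ny) (if dist ≤ v then dist else v)

def findLadder (check land : List (List Int)) (N : Int) : PySem.Dict (Int × Int) Int :=
  (PySem.List.pyRange 0 N 1).foldl (fun lad i =>
    (PySem.List.pyRange 0 N 1).foldl (fun lad j =>
      [((0 : Int), (-1 : Int)), (0, 1), (1, 0), (-1, 0)].foldl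
        (ladderStep check land N i j (pvGet2 check i j)) lad) lad)
    PySem.Dict.empty

-- find_root(x, root): returns (root, compressed dict); fuel-guarded (chains are acyclic and short,
-- proved below; the fuel-out / missing-key fallbacks are unreachable under the kruskal invariant)
def findRoot : Nat → Int → PySem.Dict Int Int → Int × PySem.Dict Int Int
  | 0, x, root => (x, root)
  | fuel + 1, x, root =>
    match root.get? x with
    | none => (x, root)
    | some p =>
      if x = p then (x, root)
      else
        let r := findRoot fuel p root
        (r.1, r.2.insert x r.1)

def unionFind (F : Nat) (x y : Int) (root : PySem.Dict Int Int) : PySem.Dict Int Int :=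
  let a := findRoot F x root
  let b := findRoot F y a.2
  b.2.insert b.1 a.1

def kruskalLoop (F : Nat) : List ((Int × Int) × Int) → PySem.Dict Int Int → Int → Int
  | [], _, s => s
  | (k, v) :: rest, roots, s =>
    let a := findRoot F k.1 roots
    let b := findRoot F k.2 a.2
    let rs := if a.1 ≠ b.1 then (unionFind F k.1 k.2 b.2, s + v) else (b.2, s)
    if rs.1.items.length = 1 then rs.2 else kruskalLoop F rest rs.1 rs.2

def kruskal (ladders : List ((Int × Int) × Int)) (group : Int) : Int :=
  let roots := (PySem.List.pyRange 1 group 1).foldl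
      (fun d g => d.insert g g) PySem.Dict.empty
  kruskalLoop (roots.items.length + ladders.length + 2) ladders roots 0

def solution (land : List (List Int)) (height : Int) : Int :=
  let N : Int := land.length
  let p := (PySem.List.pyRange 0 N 1).foldl (fun s i =>
      (PySem.List.pyRange 0 N 1).foldl (fun s j =>
        if pvGet2 s.1 i j = 0 then (BFS land height s.1 (i, j) s.2 N, s.2 + 1) else s) s)
    ((PySem.List.pyRange 0 N 1).map (fun _ => (PySem.List.pyRange 0 N 1).map (fun _ => (0 : Int))), 1)
  let ladders := findLadder p.1 land N
  kruskal (PySem.List.sorted ladders.items (fun e => e.2) false) p.2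

-- ===== PORT B =====

-- the fixed neighbour-offset tuple 'dirs' of Source B
def bDirs : List (Int × Int) := [(0, -1), (0, 1), (1, 0), (-1, 0)]

-- the unlabeled in-reach neighbours of (ri, ci), read off the flat label list before any
-- marking (the list comprehension 'cand' of Source B)
def bCand (land : List (List Int)) (height sz : Int) (label : List Int) (ri ci : Int) :
    List (Int × Int) :=
  bDirs.filterMap (fun dv =>
    if 0 ≤ ri + dv.1 ∧ ri + dv.1 < sz ∧ 0 ≤ ci + dv.2 ∧ ci + dv.2 < sz ∧
        PySem.List.pyGetD label ((ri + dv.1) * sz + (ci + dv.2)) 0 = 0 ∧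
        |pvGet2 land (ri + dv.1) (ci + dv.2) - pvGet2 land ri ci| ≤ height
    then some (ri + dv.1, ci + dv.2) else none)

-- 'for nr, nc in cand: label[nr*sz+nc] = groups'
def bMark (sz grp : Int) (label : List Int) (cand : List (Int × Int)) : List Int :=
  cand.foldl (fun lab cell => PySem.List.pySetD lab (cell.1 * sz + cell.2) grp) label

-- 'while stack:' with stack.pop() from the end, then 'stack += cand'
def bDfs (land : List (List Int)) (height sz grp : Int) :
    Nat → List Int → List (Int × Int) → List Int
  | 0, label, _ => label
  | fuel + 1, label, stack =>
    match stack.getLast? with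
    | none => label
    | some cell =>
      let cand := bCand land height sz label cell.1 cell.2
      bDfs land height sz grp fuel (bMark sz grp label cand) (stack.dropLast ++ cand)

-- phase 1 of Source B: one scan over the flat cell indices idx = ri*sz+ci
def bLabelGrid (land : List (List Int)) (height sz : Int) : List Int × Int :=
  (PySem.List.pyRange 0 (sz * sz) 1).foldl (fun st idx =>
    if PySem.List.pyGetD st.1 idx 0 = 0 then
      (bDfs land height sz (st.2 + 1) (sz.toNat * sz.toNat + 1)
        (PySem.List.pySetD st.1 idx (st.2 + 1))
        [(PySem.Int.floordiv idx sz, PySem.Int.mod idx sz)], st.2 + 1)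
    else st)
    ((PySem.List.pyRange 0 (sz * sz) 1).map (fun _ => (0 : Int)), 0)

-- the ((grp, grp'), w) pairs of one cell's comprehension in phase 2 of Source B
def bEdges (land : List (List Int)) (sz : Int) (label : List Int) (grp ri ci : Int) :
    List ((Int × Int) × Int) :=
  bDirs.filterMap (fun dv =>
    if 0 ≤ ri + dv.1 ∧ ri + dv.1 < sz ∧ 0 ≤ ci + dv.2 ∧ ci + dv.2 < sz ∧
        PySem.List.pyGetD label ((ri + dv.1) * sz + (ci + dv.2)) 0 ≠ grp
    then some ((grp, PySem.List.pyGetD label ((ri + dv.1) * sz + (ci + dv.2)) 0),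
               |pvGet2 land ri ci - pvGet2 land (ri + dv.1) (ci + dv.2)|)
    else none)

-- 'if key not in best or w < best[key]: best[key] = w'
def bUpd (best : PySem.Dict (Int × Int) Int) (ed : (Int × Int) × Int) :
    PySem.Dict (Int × Int) Int :=
  match best.get? ed.1 with
  | none => best.insert ed.1 ed.2
  | some w => if ed.2 < w then best.insert ed.1 ed.2 else best

-- phase 2 of Source B: again one scan over the flat indices
def bBest (land : List (List Int)) (sz : Int) (label : List Int) :
    PySem.Dict (Int × Int) Int :=
  (PySem.List.pyRange 0 (sz * sz) 1).foldl (fun best idx =>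
    (bEdges land sz label (PySem.List.pyGetD label idx 0)
      (PySem.Int.floordiv idx sz) (PySem.Int.mod idx sz)).foldl bUpd best)
    PySem.Dict.empty

-- phase 3 of Source B: Kruskal with comp = list(range(groups+1)), relabelling on merge
def bKruskal (es : List ((Int × Int) × Int)) (groups : Int) : Int :=
  (es.foldl (fun st ed =>
    let ca := PySem.List.pyGetD st.2 ed.1.1 0
    let cb := PySem.List.pyGetD st.2 ed.1.2 0
    if ca ≠ cb then (st.1 + ed.2, st.2.map (fun lbl => if lbl = cb then ca else lbl)) else st)
    ((0 : Int), PySem.List.pyRange 0 (groups + 1) 1)).1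

def solution_alt (land : List (List Int)) (height : Int) : Int :=
  let sz : Int := land.length
  let lab := bLabelGrid land height sz
  bKruskal (PySem.List.sorted (bBest land sz lab.1).items (fun ed => ed.2) false) lab.2

-- ===== PRECONDITION & SPEC =====

-- Pre_ excludes exactly the inputs where Python A raises IndexError: a grid with at least two
-- rows in which some row is shorter than len(land) (every cell's height is then read and the
-- short row is indexed out of range); a 1×1 grid never reads land, so it stays inside.
def Pre_solution (land : List (List Int)) (height : Int) : Prop :=
  land.length ≤ 1 ∨ ∀ row ∈ land, land.length ≤ row.length
instance (land : List (List Int)) (height : Int) : Decidable (Pre_solution land height) := by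
  unfold Pre_solution; infer_instance

def pvWitness_solution : List (List Int) × Int := ([[1, 3], [10, 2]], 2)

def Spec_solution (land : List (List Int)) (height : Int) (out : Int) : Prop := out = solution_alt land height
instance (land : List (List Int)) (height : Int) (out : Int) : Decidable (Spec_solution land height out) := by unfold Spec_solution; infer_instance

-- ===== CLAIM (what is proved, stated in full; the proofs are below) =====
def Claim_equal_solution : Prop := ∀ (land : List (List Int)) (height : Int), Dom_solution land height → Pre_solution land height → Spec_solution land height (solution land height)

-- ===== LEMMAS AND PROOFS =====

-- ---------- proof-side mirror of A's loops in B-friendly shape (used only by the proofs) ----------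

def dfsStepB (land : List (List Int)) (height N g x y : Int)
    (s : List (List Int) × List (Int × Int)) (d : Int × Int) :
    List (List Int) × List (Int × Int) :=
  let nx := x + d.1
  let ny := y + d.2
  if 0 ≤ nx ∧ nx < N ∧ 0 ≤ ny ∧ ny < N ∧ pvGet2 s.1 nx ny = 0
      ∧ |pvGet2 land nx ny - pvGet2 land x y| ≤ height then
    (pvSet2 s.1 nx ny g, s.2 ++ [(nx, ny)])
  else s

def dfsLoopB (land : List (List Int)) (height N g : Int) :
    Nat → List (List Int) → List (Int × Int) → List (List Int)
  | 0, check, _ => check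
  | fuel + 1, check, stack =>
    match stack.getLast? with
    | none => check
    | some c =>
      let s := [((0 : Int), (-1 : Int)), (0, 1), (1, 0), (-1, 0)].foldl
          (dfsStepB land height N g c.1 c.2) (check, stack.dropLast)
      dfsLoopB land height N g fuel s.1 s.2

def bestStepB (check land : List (List Int)) (N i j g : Int)
    (best : PySem.Dict (Int × Int) Int) (d : Int × Int) : PySem.Dict (Int × Int) Int :=
  let nx := i + d.1
  let ny := j + d.2
  if 0 ≤ nx ∧ nx < N ∧ 0 ≤ ny ∧ ny < N ∧ pvGet2 check nx ny ≠ g then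
    let dd := |pvGet2 land i j - pvGet2 land nx ny|
    match best.get? (g, pvGet2 check nx ny) with
    | none => best.insert (g, pvGet2 check nx ny) dd
    | some v => if dd < v then best.insert (g, pvGet2 check nx ny) dd else best
  else best

def kruskalLoopB (es : List ((Int × Int) × Int)) (comp : PySem.Dict Int Int) : Int :=
  (es.foldl (fun s e =>
    let cx := (s.2.get? e.1.1).getD 0
    let cy := (s.2.get? e.1.2).getD 0
    if cx ≠ cy then
      (s.1 + e.2, PySem.Dict.mk (s.2.items.map (fun p => if p.2 = cy then (p.1, cx) else p)))
    else s) ((0 : Int), comp)).1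

-- ---------- basic matrix facts ----------

def pvWF (n : Nat) (m : List (List Int)) : Prop :=
  m.length = n ∧ ∀ row ∈ m, row.length = n

theorem pvGetD_out {α : Type} (xs : List α) (i : Int) (d : α) (h : (xs.length : Int) ≤ i) :
    PySem.List.pyGetD xs i d = d := by
  apply PySem.List.pyGetD_of_none
  rw [PySem.List.pyGet?_eq_none_iff]
  unfold PySem.Raise.InRange
  omega

theorem pvGetD_int {α : Type} (xs : List α) (i : Int) (d : α) (h0 : 0 ≤ i) (h1 : i < (xs.length : Int)) :
    PySem.List.pyGetD xs i d = xs[i.toNat]'(by omega) :=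
  PySem.List.pyGetD_eq_getElem xs d h0 h1

theorem pvGet2_elem (m : List (List Int)) (n : Nat) (hWF : pvWF n m) (a b : Int)
    (ha : 0 ≤ a) (ha' : a < (n : Int)) (hb : 0 ≤ b) :
    pvGet2 m a b = (m[a.toNat]'(by have := hWF.1; omega)).getD b.toNat 0 := by
  have h1 := hWF.1
  have h2 : (m[a.toNat]'(by omega)).length = n := hWF.2 _ (List.getElem_mem (by omega))
  rw [pvGet2, pvGetD_int m a [] ha (by omega)]
  by_cases hb' : b < (n : Int)
  · rw [pvGetD_int _ b 0 hb (by rw [h2]; omega), List.getD_eq_getElem _ _ (by rw [h2]; omega)]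
  · rw [pvGetD_out _ b 0 (by rw [h2]; omega), List.getD_eq_default _ _ (by rw [h2]; omega)]

theorem pvSet2_eq (m : List (List Int)) (i j v : Int) (hi : 0 ≤ i) (hi' : i < (m.length : Int))
    (hj : 0 ≤ j) :
    pvSet2 m i j v = m.set i.toNat ((m[i.toNat]'(by omega)).set j.toNat v) := by
  rw [pvSet2, pvGetD_int m i [] hi hi', PySem.List.pySetD_of_nonneg _ _ hj,
    PySem.List.pySetD_of_nonneg _ _ hi]

theorem pvWF_set (m : List (List Int)) (n : Nat) (hWF : pvWF n m) (i j v : Int)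
    (hi : 0 ≤ i) (hi' : i < (n : Int)) (hj : 0 ≤ j) :
    pvWF n (pvSet2 m i j v) := by
  obtain ⟨hl, hr⟩ := hWF
  rw [pvSet2_eq m i j v hi (by omega) hj]
  refine ⟨by simp [hl], ?_⟩
  intro row hrow
  rcases List.mem_or_eq_of_mem_set hrow with h | h
  · exact hr row h
  · subst h
    rw [List.length_set]
    exact hr _ (List.getElem_mem _)

theorem pvGet2_pvSet2 (m : List (List Int)) (n : Nat) (hWF : pvWF n m) (i j v : Int)
    (hi : 0 ≤ i) (hi' : i < (n : Int)) (hj : 0 ≤ j) (hj' : j < (n : Int))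
    (a b : Int) (ha : 0 ≤ a) (hb : 0 ≤ b) :
    pvGet2 (pvSet2 m i j v) a b = if a = i ∧ b = j then v else pvGet2 m a b := by
  have hWF' : pvWF n (pvSet2 m i j v) := pvWF_set m n hWF i j v hi hi' hj
  obtain ⟨hl, hr⟩ := hWF
  have hset := pvSet2_eq m i j v hi (by omega) hj
  rw [hset] at hWF'
  by_cases han : a < (n : Int)
  · rw [hset, pvGet2_elem _ n hWF' a b ha han hb, pvGet2_elem m n ⟨hl, hr⟩ a b ha han hb]
    rw [List.getElem_set]
    by_cases hai : a = i
    · subst hai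
      rw [if_pos (by omega)]
      rw [List.getD_eq_getElem?_getD, List.getD_eq_getElem?_getD, List.getElem?_set]
      have hrowlen : (m[a.toNat]'(by omega)).length = n := hr _ (List.getElem_mem _)
      by_cases hbj : b = j
      · subst hbj
        rw [if_pos rfl, if_pos (by omega)]
        simp
      · rw [if_neg (by omega), if_neg (by omega)]
    · rw [if_neg (by omega), if_neg (by rintro ⟨rfl, _⟩; omega)]
  · rw [hset, pvGet2, pvGetD_out _ a [] (by have := hWF'.1; omega), pvGet2,
      pvGetD_out m a [] (by omega), if_neg (by rintro ⟨rfl, _⟩; omega)]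

theorem pvMat_ext (n : Nat) (m m' : List (List Int)) (h1 : pvWF n m) (h2 : pvWF n m')
    (h : ∀ a b : Int, 0 ≤ a → a < (n : Int) → 0 ≤ b → b < (n : Int) → pvGet2 m a b = pvGet2 m' a b) :
    m = m' := by
  obtain ⟨hl1, hr1⟩ := h1
  obtain ⟨hl2, hr2⟩ := h2
  apply List.ext_getElem (by omega)
  intro a ha ha'
  apply List.ext_getElem
  · rw [hr1 _ (List.getElem_mem _), hr2 _ (List.getElem_mem _)]
  intro b hb hb'
  have hrow1 : (m[a]'ha).length = n := hr1 _ (List.getElem_mem _)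
  have e := h a b (by omega) (by omega) (by omega) (by rw [hrow1] at hb; omega)
  rw [pvGet2_elem m n ⟨hl1, hr1⟩ a b (by omega) (by omega) (by omega),
    pvGet2_elem m' n ⟨hl2, hr2⟩ a b (by omega) (by omega) (by omega)] at e
  have ta : ((a : Int)).toNat = a := by omega
  have tb : ((b : Int)).toNat = b := by omega
  simp only [ta, tb] at e
  rw [List.getD_eq_getElem _ _ (by omega), List.getD_eq_getElem _ _ (by rw [hr2 _ (List.getElem_mem _)]; rw [hrow1] at hb; omega)] at e
  exact e

def pvDirList : List (Int × Int) := [(0, -1), (0, 1), (1, 0), (-1, 0)]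

def pvInb (n : Nat) (c : Int × Int) : Prop :=
  0 ≤ c.1 ∧ c.1 < (n : Int) ∧ 0 ≤ c.2 ∧ c.2 < (n : Int)

def pvFree (land : List (List Int)) (height : Int) (n : Nat) (c c' : Int × Int) : Prop :=
  pvInb n c' ∧ (∃ d ∈ pvDirList, c' = (c.1 + d.1, c.2 + d.2)) ∧
  |pvGet2 land c'.1 c'.2 - pvGet2 land c.1 c.2| ≤ height

inductive pvReach (land : List (List Int)) (height : Int) (n : Nat)
    (check0 : List (List Int)) (seed : Int × Int) : (Int × Int) → Prop
  | refl : pvReach land height n check0 seed seed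
  | step {c c' : Int × Int} : pvReach land height n check0 seed c →
      pvFree land height n c c' → pvGet2 check0 c'.1 c'.2 = 0 →
      pvReach land height n check0 seed c'

def pvBox (n : Nat) : Finset (Int × Int) :=
  (Finset.range n ×ˢ Finset.range n).image (fun p => ((p.1 : Int), (p.2 : Int)))

theorem mem_pvBox (n : Nat) (c : Int × Int) : c ∈ pvBox n ↔ pvInb n c := by
  unfold pvBox pvInb
  simp only [Finset.mem_image, Finset.mem_product, Finset.mem_range, Prod.exists]
  constructor
  · rintro ⟨a, b, ⟨ha, hb⟩, rfl⟩
    simp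
    omega
  · rintro ⟨h1, h2, h3, h4⟩
    exact ⟨c.1.toNat, c.2.toNat, ⟨by omega, by omega⟩, Prod.ext (by simp; omega) (by simp; omega)⟩

theorem card_pvBox (n : Nat) : (pvBox n).card = n * n := by
  unfold pvBox
  rw [Finset.card_image_of_injective _ (by
    intro p q h
    simp only [Prod.mk.injEq] at h
    exact Prod.ext (by omega) (by omega))]
  rw [Finset.card_product, Finset.card_range]

-- the per-call state properties (check0 = the matrix at call entry)
def pvSProps (land : List (List Int)) (height : Int) (n : Nat) (check0 : List (List Int))
    (seed : Int × Int) (S : Finset (Int × Int)) : Prop :=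
  ∀ c ∈ S, pvInb n c ∧ pvGet2 check0 c.1 c.2 = 0 ∧ pvReach land height n check0 seed c

def pvVals (n : Nat) (g : Int) (check0 : List (List Int)) (S : Finset (Int × Int))
    (check : List (List Int)) : Prop :=
  ∀ a b : Int, 0 ≤ a → 0 ≤ b →
    pvGet2 check a b = if ((a, b) : Int × Int) ∈ S then g else pvGet2 check0 a b

theorem pvStep_eq (land : List (List Int)) (height N g x y : Int) :
    bfsStep land height N g x y = dfsStepB land height N g x y := by
  funext s d
  unfold bfsStep dfsStepB
  by_cases h1 : x + d.1 < 0 ∨ N ≤ x + d.1 ∨ y + d.2 < 0 ∨ N ≤ y + d.2 ∨ pvGet2 s.1 (x + d.1) (y + d.2) ≠ 0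
  · rw [if_pos h1, if_neg (by
      rintro ⟨c1, c2, c3, c4, c5, c6⟩
      rcases h1 with h | h | h | h | h
      · omega
      · omega
      · omega
      · omega
      · exact h c5)]
  · have h1' : 0 ≤ x + d.1 ∧ x + d.1 < N ∧ 0 ≤ y + d.2 ∧ y + d.2 < N ∧
        pvGet2 s.1 (x + d.1) (y + d.2) = 0 := by
      by_cases hz : pvGet2 s.1 (x + d.1) (y + d.2) = 0
      · exact ⟨by omega, by omega, by omega, by omega, hz⟩
      · exact absurd (Or.inr (Or.inr (Or.inr (Or.inr hz)))) h1
    rw [if_neg h1]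
    by_cases h2 : |pvGet2 land (x + d.1) (y + d.2) - pvGet2 land x y| ≤ height
    · rw [if_pos h2, if_pos ⟨h1'.1, h1'.2.1, h1'.2.2.1, h1'.2.2.2.1, h1'.2.2.2.2, h2⟩]
    · rw [if_neg h2, if_neg (by rintro ⟨_, _, _, _, _, c6⟩; exact h2 c6)]

theorem dfsStepB_mark (land : List (List Int)) (height N g x y : Int)
    (s : List (List Int) × List (Int × Int)) (d : Int × Int)
    (h : 0 ≤ x + d.1 ∧ x + d.1 < N ∧ 0 ≤ y + d.2 ∧ y + d.2 < N ∧
      pvGet2 s.1 (x + d.1) (y + d.2) = 0 ∧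
      |pvGet2 land (x + d.1) (y + d.2) - pvGet2 land x y| ≤ height) :
    dfsStepB land height N g x y s d =
      (pvSet2 s.1 (x + d.1) (y + d.2) g, s.2 ++ [(x + d.1, y + d.2)]) := by
  unfold dfsStepB
  rw [if_pos h]

theorem dfsStepB_skip (land : List (List Int)) (height N g x y : Int)
    (s : List (List Int) × List (Int × Int)) (d : Int × Int)
    (h : ¬ (0 ≤ x + d.1 ∧ x + d.1 < N ∧ 0 ≤ y + d.2 ∧ y + d.2 < N ∧
      pvGet2 s.1 (x + d.1) (y + d.2) = 0 ∧
      |pvGet2 land (x + d.1) (y + d.2) - pvGet2 land x y| ≤ height)) :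
    dfsStepB land height N g x y s d = s := by
  unfold dfsStepB
  rw [if_neg h]

theorem pvExpand (land : List (List Int)) (height : Int) (n : Nat) (g : Int)
    (check0 : List (List Int)) (seed : Int × Int) (hg : g ≠ 0)
    (c : Int × Int) :
    ∀ (ds : List (Int × Int)), (∀ d ∈ ds, d ∈ pvDirList) →
    ∀ (S : Finset (Int × Int)) (check : List (List Int)) (acc : List (Int × Int)),
      pvWF n check → pvSProps land height n check0 seed S → pvVals n g check0 S check →
      c ∈ S →
      ∃ new : List (Int × Int),
        (ds.foldl (dfsStepB land height (n : Int) g c.1 c.2) (check, acc)).2 = acc ++ new ∧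
        new.Nodup ∧
        (∀ e ∈ new, e ∉ S) ∧
        pvSProps land height n check0 seed (S ∪ new.toFinset) ∧
        pvWF n (ds.foldl (dfsStepB land height (n : Int) g c.1 c.2) (check, acc)).1 ∧
        pvVals n g check0 (S ∪ new.toFinset)
          (ds.foldl (dfsStepB land height (n : Int) g c.1 c.2) (check, acc)).1 ∧
        (∀ d ∈ ds, ∀ c' : Int × Int, c' = (c.1 + d.1, c.2 + d.2) →
          pvFree land height n c c' → pvGet2 check0 c'.1 c'.2 = 0 →
          c' ∈ S ∪ new.toFinset) := by
  intro ds
  induction ds with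
  | nil =>
    intro _ S check acc hWF hS hV hc
    exact ⟨[], by simp, by simp, by simp, by simpa using hS, by simpa using hWF,
      by simpa using hV, by simp⟩
  | cons d ds ih =>
    intro hds S check acc hWF hS hV hc
    have hdmem : d ∈ pvDirList := hds d List.mem_cons_self
    by_cases hmark : 0 ≤ c.1 + d.1 ∧ c.1 + d.1 < (n : Int) ∧ 0 ≤ c.2 + d.2 ∧
        c.2 + d.2 < (n : Int) ∧ pvGet2 check (c.1 + d.1) (c.2 + d.2) = 0 ∧
        |pvGet2 land (c.1 + d.1) (c.2 + d.2) - pvGet2 land c.1 c.2| ≤ height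
    · obtain ⟨hm1, hm2, hm3, hm4, hm5, hm6⟩ := hmark
      set e : Int × Int := (c.1 + d.1, c.2 + d.2) with he
      have hstep : dfsStepB land height (n : Int) g c.1 c.2 (check, acc) d =
          (pvSet2 check e.1 e.2 g, acc ++ [e]) :=
        dfsStepB_mark land height (n : Int) g c.1 c.2 (check, acc) d
          ⟨hm1, hm2, hm3, hm4, hm5, hm6⟩
      have hinb : pvInb n e := ⟨hm1, hm2, hm3, hm4⟩
      have hveq := hV e.1 e.2 (by omega) (by omega)
      have hnotS : e ∉ S := by
        intro hmem
        rw [if_pos (by simpa using hmem)] at hveq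
        rw [hveq] at hm5
        exact hg hm5
      have h0 : pvGet2 check0 e.1 e.2 = 0 := by
        rw [if_neg (by simpa using hnotS)] at hveq
        rw [← hveq]; exact hm5
      have hreach : pvReach land height n check0 seed e :=
        pvReach.step (hS c hc).2.2 ⟨hinb, ⟨d, hdmem, rfl⟩, hm6⟩ h0
      have hWF1 : pvWF n (pvSet2 check e.1 e.2 g) :=
        pvWF_set check n hWF e.1 e.2 g (by omega) (by omega) (by omega)
      have hS1 : pvSProps land height n check0 seed (insert e S) := by
        intro c' hc'
        rcases Finset.mem_insert.mp hc' with rfl | hc'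
        · exact ⟨hinb, h0, hreach⟩
        · exact hS c' hc'
      have hV1 : pvVals n g check0 (insert e S) (pvSet2 check e.1 e.2 g) := by
        intro a b ha hb
        rw [pvGet2_pvSet2 check n hWF e.1 e.2 g (by omega) (by omega) (by omega) (by omega) a b ha hb]
        by_cases hab : ((a, b) : Int × Int) = e
        · rw [if_pos (by rw [Prod.ext_iff] at hab; exact ⟨hab.1, hab.2⟩),
            if_pos (by rw [hab]; exact Finset.mem_insert_self _ _)]
        · rw [if_neg (by rw [Prod.ext_iff] at hab; intro hx; exact hab ⟨hx.1, hx.2⟩)]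
          rw [hV a b ha hb]
          by_cases hab2 : ((a, b) : Int × Int) ∈ S
          · rw [if_pos hab2, if_pos (Finset.mem_insert_of_mem hab2)]
          · rw [if_neg hab2, if_neg (by
              intro hx
              rcases Finset.mem_insert.mp hx with hx | hx
              · exact hab hx
              · exact hab2 hx)]
      obtain ⟨new1, hq1, hnd1, hnotS1, hS1', hWF1', hV1', hfr1⟩ :=
        ih (fun d' hd' => hds d' (List.mem_cons_of_mem _ hd'))
          (insert e S) (pvSet2 check e.1 e.2 g) (acc ++ [e]) hWF1 hS1 hV1
          (Finset.mem_insert_of_mem hc)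
      have hSeq : S ∪ (e :: new1).toFinset = insert e S ∪ new1.toFinset := by
        rw [List.toFinset_cons, Finset.union_insert, Finset.insert_union]
      refine ⟨e :: new1, ?_, ?_, ?_, ?_, ?_, ?_, ?_⟩
      · rw [List.foldl_cons, hstep, hq1, List.append_assoc]
        rfl
      · refine List.nodup_cons.mpr ⟨?_, hnd1⟩
        intro hmem
        exact hnotS1 e hmem (Finset.mem_insert_self _ _)
      · intro e' he'
        rcases List.mem_cons.mp he' with rfl | he'
        · exact hnotS
        · exact fun hmem => hnotS1 e' he' (Finset.mem_insert_of_mem hmem)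
      · rw [hSeq]; exact hS1'
      · rw [List.foldl_cons, hstep]; exact hWF1'
      · rw [hSeq, List.foldl_cons, hstep]; exact hV1'
      · intro d' hd' c' hc' hfree' h0'
        rw [hSeq]
        rcases List.mem_cons.mp hd' with rfl | hd'
        · subst hc'
          exact Finset.mem_union_left _ (Finset.mem_insert_self _ _)
        · exact hfr1 d' hd' c' hc' hfree' h0'
    · have hstep : dfsStepB land height (n : Int) g c.1 c.2 (check, acc) d = (check, acc) :=
        dfsStepB_skip land height (n : Int) g c.1 c.2 (check, acc) d hmark
      obtain ⟨new1, hq1, hnd1, hnotS1, hS1', hWF1', hV1', hfr1⟩ :=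
        ih (fun d' hd' => hds d' (List.mem_cons_of_mem _ hd')) S check acc hWF hS hV hc
      refine ⟨new1, ?_, hnd1, hnotS1, hS1', ?_, ?_, ?_⟩
      · rw [List.foldl_cons, hstep]; exact hq1
      · rw [List.foldl_cons, hstep]; exact hWF1'
      · rw [List.foldl_cons, hstep]; exact hV1'
      · intro d' hd' c' hc' hfree' h0'
        rcases List.mem_cons.mp hd' with rfl | hd'
        · -- the neighbour was already marked: it must be in S
          have hbounds := hfree'.1
          rw [hc'] at hbounds
          obtain ⟨hb1, hb2, hb3, hb4⟩ := hbounds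
          have habs := hfree'.2.2
          rw [hc'] at habs
          simp only at hb1 hb2 hb3 hb4 habs
          by_cases hmem : ((c.1 + d'.1, c.2 + d'.2) : Int × Int) ∈ S
          · rw [hc']; exact Finset.mem_union_left _ hmem
          · exfalso
            apply hmark
            refine ⟨hb1, hb2, hb3, hb4, ?_, habs⟩
            have hveq := hV (c.1 + d'.1) (c.2 + d'.2) (by omega) (by omega)
            rw [if_neg hmem] at hveq
            rw [hveq]
            rw [hc'] at h0'
            exact h0'
        · exact hfr1 d' hd' c' hc' hfree' h0'

theorem pvBfsLoop_spec (land : List (List Int)) (height : Int) (n : Nat) (g : Int)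
    (check0 : List (List Int)) (seed : Int × Int) (hg : g ≠ 0) :
    ∀ (fuel : Nat) (S : Finset (Int × Int)) (check : List (List Int)) (q : List (Int × Int)),
      pvWF n check → seed ∈ S → pvSProps land height n check0 seed S →
      pvVals n g check0 S check →
      (∀ c ∈ q, c ∈ S) →
      (∀ c ∈ S, c ∉ q → ∀ c', pvFree land height n c c' →
        pvGet2 check0 c'.1 c'.2 = 0 → c' ∈ S) →
      (pvBox n \ S).card + q.length ≤ fuel →
      ∃ T : Finset (Int × Int), S ⊆ T ∧ seed ∈ T ∧
        pvSProps land height n check0 seed T ∧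
        (∀ c ∈ T, ∀ c', pvFree land height n c c' →
          pvGet2 check0 c'.1 c'.2 = 0 → c' ∈ T) ∧
        pvWF n (bfsLoop land height (n : Int) g fuel check q) ∧
        pvVals n g check0 T (bfsLoop land height (n : Int) g fuel check q) := by
  intro fuel
  induction fuel with
  | zero =>
    intro S check q hWF hseed hS hV hq hfr hfuel
    have hq0 : q = [] := by
      cases q with
      | nil => rfl
      | cons a t => simp only [List.length_cons] at hfuel; omega
    subst hq0
    exact ⟨S, Finset.Subset.refl S, hseed, hS,
      (fun c hc c' => hfr c hc (by simp) c'), hWF, hV⟩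
  | succ fuel ih =>
    intro S check q hWF hseed hS hV hq hfr hfuel
    cases q with
    | nil =>
      exact ⟨S, Finset.Subset.refl S, hseed, hS,
        (fun c hc c' => hfr c hc (by simp) c'), hWF, hV⟩
    | cons c rest =>
      have hloop : bfsLoop land height (n : Int) g (fuel + 1) check (c :: rest) =
          bfsLoop land height (n : Int) g fuel
            (([((0 : Int), (-1 : Int)), (0, 1), (1, 0), (-1, 0)].foldl
              (dfsStepB land height (n : Int) g c.1 c.2) (check, rest))).1
            (([((0 : Int), (-1 : Int)), (0, 1), (1, 0), (-1, 0)].foldl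
              (dfsStepB land height (n : Int) g c.1 c.2) (check, rest))).2 := by
        simp only [bfsLoop]
        rw [pvStep_eq]
      obtain ⟨new, hq2, hnd, hnotS, hS', hWF', hV', hfr'⟩ :=
        pvExpand land height n g check0 seed hg c
          [((0 : Int), (-1 : Int)), (0, 1), (1, 0), (-1, 0)] (fun d hd => hd)
          S check rest hWF hS hV (hq c List.mem_cons_self)
      have hsub : new.toFinset ⊆ pvBox n \ S := by
        intro z hz
        rw [List.mem_toFinset] at hz
        rw [Finset.mem_sdiff, mem_pvBox]
        exact ⟨(hS' z (Finset.mem_union_right _ (List.mem_toFinset.mpr hz))).1, hnotS z hz⟩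
      have hcard : (pvBox n \ (S ∪ new.toFinset)).card =
          (pvBox n \ S).card - new.toFinset.card := by
        have : pvBox n \ (S ∪ new.toFinset) = (pvBox n \ S) \ new.toFinset := by
          ext z
          simp only [Finset.mem_sdiff, Finset.mem_union]
          tauto
        rw [this, Finset.card_sdiff, Finset.inter_eq_left.mpr hsub]
      have hlen : new.toFinset.card = new.length := List.toFinset_card_of_nodup hnd
      obtain ⟨T, hsubT, hseedT, hST, hclT, hWFT, hVT⟩ :=
        ih (S ∪ new.toFinset)
          (([((0 : Int), (-1 : Int)), (0, 1), (1, 0), (-1, 0)].foldl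
            (dfsStepB land height (n : Int) g c.1 c.2) (check, rest))).1
          (rest ++ new)
          hWF' (Finset.mem_union_left _ hseed) hS' hV'
          (by
            intro z hz
            rcases List.mem_append.mp hz with hz | hz
            · exact Finset.mem_union_left _ (hq z (List.mem_cons_of_mem _ hz))
            · exact Finset.mem_union_right _ (List.mem_toFinset.mpr hz))
          (by
            intro z hz hznot c' hfree h0
            rcases Finset.mem_union.mp hz with hz | hz
            · by_cases hzc : z = c
              · subst hzc
                obtain ⟨d, hd, hc'⟩ := hfree.2.1
                exact hfr' d hd c' hc' hfree h0
              · have : z ∉ c :: rest := by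
                  intro hmem
                  rcases List.mem_cons.mp hmem with rfl | hmem
                  · exact hzc rfl
                  · exact hznot (List.mem_append.mpr (Or.inl hmem))
                exact Finset.mem_union_left _ (hfr z hz this c' hfree h0)
            · exact absurd (List.mem_append.mpr
                (Or.inr (List.mem_toFinset.mp hz))) hznot)
          (by
            have h1 : new.length ≤ (pvBox n \ S).card := by
              rw [← hlen]; exact Finset.card_le_card hsub
            rw [hcard, hlen]
            simp only [List.length_append, List.length_cons] at hfuel ⊢
            omega)
      rw [hloop, hq2]
      exact ⟨T, Finset.Subset.trans (Finset.subset_union_left) hsubT, hseedT, hST,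
        hclT, hWFT, hVT⟩

theorem pvDfsLoop_spec (land : List (List Int)) (height : Int) (n : Nat) (g : Int)
    (check0 : List (List Int)) (seed : Int × Int) (hg : g ≠ 0) :
    ∀ (fuel : Nat) (S : Finset (Int × Int)) (check : List (List Int)) (q : List (Int × Int)),
      pvWF n check → seed ∈ S → pvSProps land height n check0 seed S →
      pvVals n g check0 S check →
      (∀ c ∈ q, c ∈ S) →
      (∀ c ∈ S, c ∉ q → ∀ c', pvFree land height n c c' →
        pvGet2 check0 c'.1 c'.2 = 0 → c' ∈ S) →
      (pvBox n \ S).card + q.length ≤ fuel →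
      ∃ T : Finset (Int × Int), S ⊆ T ∧ seed ∈ T ∧
        pvSProps land height n check0 seed T ∧
        (∀ c ∈ T, ∀ c', pvFree land height n c c' →
          pvGet2 check0 c'.1 c'.2 = 0 → c' ∈ T) ∧
        pvWF n (dfsLoopB land height (n : Int) g fuel check q) ∧
        pvVals n g check0 T (dfsLoopB land height (n : Int) g fuel check q) := by
  intro fuel
  induction fuel with
  | zero =>
    intro S check q hWF hseed hS hV hq hfr hfuel
    have hq0 : q = [] := by
      cases q with
      | nil => rfl
      | cons a t => simp only [List.length_cons] at hfuel; omega
    subst hq0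
    exact ⟨S, Finset.Subset.refl S, hseed, hS,
      (fun c hc c' => hfr c hc (by simp) c'), hWF, hV⟩
  | succ fuel ih =>
    intro S check q hWF hseed hS hV hq hfr hfuel
    rcases List.eq_nil_or_concat q with rfl | ⟨init, c, rfl⟩
    · exact ⟨S, Finset.Subset.refl S, hseed, hS,
        (fun c hc c' => hfr c hc (by simp) c'), hWF, hV⟩
    · rw [List.concat_eq_append] at hq hfr hfuel ⊢
      have hloop : dfsLoopB land height (n : Int) g (fuel + 1) check (init ++ [c]) =
          dfsLoopB land height (n : Int) g fuel
            (([((0 : Int), (-1 : Int)), (0, 1), (1, 0), (-1, 0)].foldl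
              (dfsStepB land height (n : Int) g c.1 c.2) (check, init))).1
            (([((0 : Int), (-1 : Int)), (0, 1), (1, 0), (-1, 0)].foldl
              (dfsStepB land height (n : Int) g c.1 c.2) (check, init))).2 := by
        simp only [dfsLoopB, List.getLast?_concat, List.dropLast_concat]
      obtain ⟨new, hq2, hnd, hnotS, hS', hWF', hV', hfr'⟩ :=
        pvExpand land height n g check0 seed hg c
          [((0 : Int), (-1 : Int)), (0, 1), (1, 0), (-1, 0)] (fun d hd => hd)
          S check init hWF hS hV (hq c (by simp))
      have hsub : new.toFinset ⊆ pvBox n \ S := by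
        intro z hz
        rw [List.mem_toFinset] at hz
        rw [Finset.mem_sdiff, mem_pvBox]
        exact ⟨(hS' z (Finset.mem_union_right _ (List.mem_toFinset.mpr hz))).1, hnotS z hz⟩
      have hcard : (pvBox n \ (S ∪ new.toFinset)).card =
          (pvBox n \ S).card - new.toFinset.card := by
        have : pvBox n \ (S ∪ new.toFinset) = (pvBox n \ S) \ new.toFinset := by
          ext z
          simp only [Finset.mem_sdiff, Finset.mem_union]
          tauto
        rw [this, Finset.card_sdiff, Finset.inter_eq_left.mpr hsub]
      have hlen : new.toFinset.card = new.length := List.toFinset_card_of_nodup hnd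
      obtain ⟨T, hsubT, hseedT, hST, hclT, hWFT, hVT⟩ :=
        ih (S ∪ new.toFinset)
          (([((0 : Int), (-1 : Int)), (0, 1), (1, 0), (-1, 0)].foldl
            (dfsStepB land height (n : Int) g c.1 c.2) (check, init))).1
          (init ++ new)
          hWF' (Finset.mem_union_left _ hseed) hS' hV'
          (by
            intro z hz
            rcases List.mem_append.mp hz with hz | hz
            · exact Finset.mem_union_left _ (hq z (List.mem_append.mpr (Or.inl hz)))
            · exact Finset.mem_union_right _ (List.mem_toFinset.mpr hz))
          (by
            intro z hz hznot c' hfree h0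
            rcases Finset.mem_union.mp hz with hz | hz
            · by_cases hzc : z = c
              · subst hzc
                obtain ⟨d, hd, hc'⟩ := hfree.2.1
                exact hfr' d hd c' hc' hfree h0
              · have : z ∉ init ++ [c] := by
                  intro hmem
                  rcases List.mem_append.mp hmem with hmem | hmem
                  · exact hznot (List.mem_append.mpr (Or.inl hmem))
                  · exact hzc (by simpa using hmem)
                exact Finset.mem_union_left _ (hfr z hz this c' hfree h0)
            · exact absurd (List.mem_append.mpr
                (Or.inr (List.mem_toFinset.mp hz))) hznot)
          (by
            have h1 : new.length ≤ (pvBox n \ S).card := by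
              rw [← hlen]; exact Finset.card_le_card hsub
            rw [hcard, hlen]
            simp only [List.length_append, List.length_cons, List.length_nil] at hfuel ⊢
            omega)
      rw [hloop, hq2]
      exact ⟨T, Finset.Subset.trans (Finset.subset_union_left) hsubT, hseedT, hST,
        hclT, hWFT, hVT⟩

theorem pvT_reach {land : List (List Int)} {height : Int} {n : Nat}
    {check0 : List (List Int)} {seed : Int × Int} {T : Finset (Int × Int)}
    (hS : pvSProps land height n check0 seed T) (hseed : seed ∈ T)
    (hcl : ∀ c ∈ T, ∀ c', pvFree land height n c c' →
      pvGet2 check0 c'.1 c'.2 = 0 → c' ∈ T) :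
    ∀ c, c ∈ T ↔ pvReach land height n check0 seed c := by
  intro c
  constructor
  · intro hc; exact (hS c hc).2.2
  · intro hr
    induction hr with
    | refl => exact hseed
    | step hr hfree h0 ih => exact hcl _ ih _ hfree h0

theorem pvFlood_eq (land : List (List Int)) (height : Int) (n : Nat) (g : Int)
    (check : List (List Int)) (fuel : Nat) (seed : Int × Int)
    (hWF : pvWF n check) (hseed : pvInb n seed)
    (h0 : pvGet2 check seed.1 seed.2 = 0) (hg : g ≠ 0) (hfuel : n * n ≤ fuel) :
    bfsLoop land height (n : Int) g fuel (pvSet2 check seed.1 seed.2 g) [seed] =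
      dfsLoopB land height (n : Int) g fuel (pvSet2 check seed.1 seed.2 g) [seed] ∧
    pvWF n (bfsLoop land height (n : Int) g fuel (pvSet2 check seed.1 seed.2 g) [seed]) ∧
    (∀ a b : Int, 0 ≤ a → 0 ≤ b →
      (pvReach land height n check seed (a, b) →
        pvGet2 (bfsLoop land height (n : Int) g fuel (pvSet2 check seed.1 seed.2 g) [seed]) a b = g) ∧
      (¬ pvReach land height n check seed (a, b) →
        pvGet2 (bfsLoop land height (n : Int) g fuel (pvSet2 check seed.1 seed.2 g) [seed]) a b =
          pvGet2 check a b)) := by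
  have hWF1 : pvWF n (pvSet2 check seed.1 seed.2 g) :=
    pvWF_set check n hWF seed.1 seed.2 g hseed.1 hseed.2.1 hseed.2.2.1
  have hS0 : pvSProps land height n check seed {seed} := by
    intro c hc
    rw [Finset.mem_singleton] at hc
    subst hc
    exact ⟨hseed, h0, pvReach.refl⟩
  have hV0 : pvVals n g check {seed} (pvSet2 check seed.1 seed.2 g) := by
    intro a b ha hb
    rw [pvGet2_pvSet2 check n hWF seed.1 seed.2 g hseed.1 hseed.2.1 hseed.2.2.1 hseed.2.2.2 a b ha hb]
    by_cases hab : ((a, b) : Int × Int) = seed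
    · rw [if_pos (by rw [Prod.ext_iff] at hab; exact ⟨hab.1, hab.2⟩),
        if_pos (Finset.mem_singleton.mpr hab)]
    · rw [if_neg (by rw [Prod.ext_iff] at hab; intro hx; exact hab ⟨hx.1, hx.2⟩),
        if_neg (fun hx => hab (Finset.mem_singleton.mp hx))]
  have hfuel0 : (pvBox n \ {seed}).card + ([seed] : List (Int × Int)).length ≤ fuel := by
    have hsub : ({seed} : Finset (Int × Int)) ⊆ pvBox n := by
      intro z hz
      rw [Finset.mem_singleton] at hz
      subst hz
      exact (mem_pvBox n z).mpr hseed
    have h1 : (pvBox n \ {seed}).card = (pvBox n).card - 1 := by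
      rw [Finset.card_sdiff, Finset.inter_eq_left.mpr hsub, Finset.card_singleton]
    have h2 : 1 ≤ (pvBox n).card := by
      refine Finset.card_pos.mpr ⟨seed, hsub (Finset.mem_singleton_self seed)⟩
    rw [h1, card_pvBox]
    rw [card_pvBox] at h2
    simp only [List.length_cons, List.length_nil]
    omega
  obtain ⟨TA, hsubA, hseedA, hSA, hclA, hWFA, hVA⟩ :=
    pvBfsLoop_spec land height n g check seed hg fuel {seed}
      (pvSet2 check seed.1 seed.2 g) [seed] hWF1 (Finset.mem_singleton_self seed)
      hS0 hV0 (by simp) (by simp) hfuel0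
  obtain ⟨TB, hsubB, hseedB, hSB, hclB, hWFB, hVB⟩ :=
    pvDfsLoop_spec land height n g check seed hg fuel {seed}
      (pvSet2 check seed.1 seed.2 g) [seed] hWF1 (Finset.mem_singleton_self seed)
      hS0 hV0 (by simp) (by simp) hfuel0
  have hTA := pvT_reach hSA hseedA hclA
  have hTB := pvT_reach hSB hseedB hclB
  have heq : bfsLoop land height (n : Int) g fuel (pvSet2 check seed.1 seed.2 g) [seed] =
      dfsLoopB land height (n : Int) g fuel (pvSet2 check seed.1 seed.2 g) [seed] := by
    apply pvMat_ext n _ _ hWFA hWFB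
    intro a b ha ha' hb hb'
    rw [hVA a b ha hb, hVB a b ha hb]
    by_cases hr : pvReach land height n check seed (a, b)
    · rw [if_pos ((hTA (a, b)).mpr hr), if_pos ((hTB (a, b)).mpr hr)]
    · rw [if_neg (fun hx => hr ((hTA (a, b)).mp hx)),
        if_neg (fun hx => hr ((hTB (a, b)).mp hx))]
  refine ⟨heq, hWFA, ?_⟩
  intro a b ha hb
  constructor
  · intro hr
    rw [hVA a b ha hb, if_pos ((hTA (a, b)).mpr hr)]
  · intro hr
    rw [hVA a b ha hb, if_neg (fun hx => hr ((hTA (a, b)).mp hx))]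

theorem pvReach_zero {land : List (List Int)} {height : Int} {n : Nat}
    {check : List (List Int)} {seed c : Int × Int}
    (h0 : pvGet2 check seed.1 seed.2 = 0)
    (h : pvReach land height n check seed c) : pvGet2 check c.1 c.2 = 0 := by
  induction h with
  | refl => exact h0
  | step _ _ h0' => exact h0'

def pvCellInv (n : Nat) (s : List (List Int) × Int) : Prop :=
  pvWF n s.1 ∧ 1 ≤ s.2 ∧
  ∀ a b : Int, 0 ≤ a → a < (n : Int) → 0 ≤ b → b < (n : Int) →
    pvGet2 s.1 a b = 0 ∨ (1 ≤ pvGet2 s.1 a b ∧ pvGet2 s.1 a b < s.2)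

theorem pvRow_eq (land : List (List Int)) (height : Int) (i : Int)
    (hi : 0 ≤ i) (hi' : i < (land.length : Int)) :
    ∀ (js : List Int) (s : List (List Int) × Int),
      (∀ j ∈ js, 0 ≤ j ∧ j < (land.length : Int)) → pvCellInv land.length s →
      (js.foldl (fun s j => if pvGet2 s.1 i j = 0 then
          (BFS land height s.1 (i, j) s.2 (land.length : Int), s.2 + 1) else s) s) =
        (js.foldl (fun s j => if pvGet2 s.1 i j = 0 then
          (dfsLoopB land height (land.length : Int) s.2 (land.length * land.length + 1)
            (pvSet2 s.1 i j s.2) [(i, j)], s.2 + 1) else s) s) ∧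
      pvCellInv land.length
        (js.foldl (fun s j => if pvGet2 s.1 i j = 0 then
          (BFS land height s.1 (i, j) s.2 (land.length : Int), s.2 + 1) else s) s) ∧
      s.2 ≤ (js.foldl (fun s j => if pvGet2 s.1 i j = 0 then
          (BFS land height s.1 (i, j) s.2 (land.length : Int), s.2 + 1) else s) s).2 ∧
      (∀ a b : Int, 0 ≤ a → a < (land.length : Int) → 0 ≤ b → b < (land.length : Int) →
        pvGet2 s.1 a b ≠ 0 →
        pvGet2 (js.foldl (fun s j => if pvGet2 s.1 i j = 0 then
          (BFS land height s.1 (i, j) s.2 (land.length : Int), s.2 + 1) else s) s).1 a b =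
          pvGet2 s.1 a b) ∧
      (∀ j ∈ js, pvGet2 (js.foldl (fun s j => if pvGet2 s.1 i j = 0 then
          (BFS land height s.1 (i, j) s.2 (land.length : Int), s.2 + 1) else s) s).1 i j ≠ 0) := by
  intro js
  induction js with
  | nil =>
    intro s _ hInv
    exact ⟨rfl, hInv, le_refl _, fun a b _ _ _ _ _ => rfl, by simp⟩
  | cons j js ih =>
    intro s hjs hInv
    obtain ⟨hj0, hj1⟩ := hjs j List.mem_cons_self
    obtain ⟨hWF, hg1, hcell⟩ := hInv
    simp only [List.foldl_cons]
    by_cases h0 : pvGet2 s.1 i j = 0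
    · rw [if_pos h0, if_pos h0]
      obtain ⟨heq, hWFr, hvals⟩ :=
        pvFlood_eq land height land.length s.2 s.1 (land.length * land.length + 1)
          (i, j) hWF ⟨hi, hi', hj0, hj1⟩ h0 (by omega) (by omega)
      have hBFS : BFS land height s.1 (i, j) s.2 (land.length : Int) =
          bfsLoop land height (land.length : Int) s.2 (land.length * land.length + 1)
            (pvSet2 s.1 i j s.2) [(i, j)] := rfl
      set res := bfsLoop land height (land.length : Int) s.2 (land.length * land.length + 1)
        (pvSet2 s.1 i j s.2) [(i, j)] with hres
      have hstep : (BFS land height s.1 (i, j) s.2 (land.length : Int), s.2 + 1) =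
          (dfsLoopB land height (land.length : Int) s.2 (land.length * land.length + 1)
            (pvSet2 s.1 i j s.2) [(i, j)], s.2 + 1) := by
        rw [hBFS]
        exact congrArg (fun m => (m, s.2 + 1)) heq
      have hInv1 : pvCellInv land.length (res, s.2 + 1) := by
        refine ⟨hWFr, by omega, ?_⟩
        intro a b ha ha' hb hb'
        obtain ⟨hR, hNR⟩ := hvals a b ha hb
        by_cases hr : pvReach land height land.length s.1 (i, j) (a, b)
        · rw [hR hr]; right; omega
        · rw [hNR hr]
          rcases hcell a b ha ha' hb hb' with h | h
          · left; exact h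
          · right; omega
      have hpres1 : ∀ a b : Int, 0 ≤ a → a < (land.length : Int) → 0 ≤ b →
          b < (land.length : Int) → pvGet2 s.1 a b ≠ 0 → pvGet2 res a b = pvGet2 s.1 a b := by
        intro a b ha ha' hb hb' hnz
        obtain ⟨hR, hNR⟩ := hvals a b ha hb
        apply hNR
        intro hr
        exact hnz (pvReach_zero h0 hr)
      have hmarkij : pvGet2 res i j ≠ 0 := by
        obtain ⟨hR, _⟩ := hvals i j hi hj0
        rw [hR pvReach.refl]
        omega
      obtain ⟨heq2, hInv2, hle2, hpres2, hmark2⟩ :=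
        ih (res, s.2 + 1) (fun j' hj' => hjs j' (List.mem_cons_of_mem _ hj')) hInv1
      refine ⟨by rw [← hstep]; exact heq2, hInv2,
        le_trans (by omega) hle2, ?_, ?_⟩
      · intro a b ha ha' hb hb' hnz
        exact (hpres2 a b ha ha' hb hb'
          (by rw [hpres1 a b ha ha' hb hb' hnz]; exact hnz)).trans
          (hpres1 a b ha ha' hb hb' hnz)
      · intro j' hj'
        rcases List.mem_cons.mp hj' with rfl | hj'
        · exact fun hc => hmarkij
            (((hpres2 i j' hi hi' hj0 hj1 hmarkij).symm).trans hc)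
        · exact hmark2 j' hj'
    · rw [if_neg h0, if_neg h0]
      obtain ⟨heq2, hInv2, hle2, hpres2, hmark2⟩ :=
        ih s (fun j' hj' => hjs j' (List.mem_cons_of_mem _ hj')) ⟨hWF, hg1, hcell⟩
      refine ⟨heq2, hInv2, hle2, hpres2, ?_⟩
      intro j' hj'
      rcases List.mem_cons.mp hj' with rfl | hj'
      · -- check[i][j] was already nonzero and is preserved
        have := hpres2 i j' hi hi' hj0 hj1 h0
        rw [this]
        exact h0
      · exact hmark2 j' hj'

theorem pvGrid_eq (land : List (List Int)) (height : Int) :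
    ∀ (is : List Int) (s : List (List Int) × Int),
      (∀ i ∈ is, 0 ≤ i ∧ i < (land.length : Int)) → pvCellInv land.length s →
      (is.foldl (fun s i => (PySem.List.pyRange 0 (land.length : Int) 1).foldl
          (fun s j => if pvGet2 s.1 i j = 0 then
            (BFS land height s.1 (i, j) s.2 (land.length : Int), s.2 + 1) else s) s) s) =
        (is.foldl (fun s i => (PySem.List.pyRange 0 (land.length : Int) 1).foldl
          (fun s j => if pvGet2 s.1 i j = 0 then
            (dfsLoopB land height (land.length : Int) s.2 (land.length * land.length + 1)
              (pvSet2 s.1 i j s.2) [(i, j)], s.2 + 1) else s) s) s) ∧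
      pvCellInv land.length
        (is.foldl (fun s i => (PySem.List.pyRange 0 (land.length : Int) 1).foldl
          (fun s j => if pvGet2 s.1 i j = 0 then
            (BFS land height s.1 (i, j) s.2 (land.length : Int), s.2 + 1) else s) s) s) ∧
      (∀ a b : Int, 0 ≤ a → a < (land.length : Int) → 0 ≤ b → b < (land.length : Int) →
        pvGet2 s.1 a b ≠ 0 →
        pvGet2 (is.foldl (fun s i => (PySem.List.pyRange 0 (land.length : Int) 1).foldl
          (fun s j => if pvGet2 s.1 i j = 0 then
            (BFS land height s.1 (i, j) s.2 (land.length : Int), s.2 + 1) else s) s) s).1 a b =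
          pvGet2 s.1 a b) ∧
      (∀ i ∈ is, ∀ b : Int, 0 ≤ b → b < (land.length : Int) →
        pvGet2 (is.foldl (fun s i => (PySem.List.pyRange 0 (land.length : Int) 1).foldl
          (fun s j => if pvGet2 s.1 i j = 0 then
            (BFS land height s.1 (i, j) s.2 (land.length : Int), s.2 + 1) else s) s) s).1 i b ≠ 0) := by
  intro is
  induction is with
  | nil =>
    intro s _ hInv
    exact ⟨rfl, hInv, fun a b _ _ _ _ _ => rfl, by simp⟩
  | cons i is ih =>
    intro s his hInv
    obtain ⟨hi0, hi1⟩ := his i List.mem_cons_self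
    have hjs : ∀ j ∈ PySem.List.pyRange 0 (land.length : Int) 1,
        0 ≤ j ∧ j < (land.length : Int) := by
      intro j hj
      rw [PySem.List.mem_pyRange_one] at hj
      exact hj
    obtain ⟨heq1, hInv1, hle1, hpres1, hmark1⟩ :=
      pvRow_eq land height i hi0 hi1 (PySem.List.pyRange 0 (land.length : Int) 1) s hjs hInv
    simp only [List.foldl_cons]
    obtain ⟨heq2, hInv2, hpres2, hmark2⟩ :=
      ih _ (fun i' hi' => his i' (List.mem_cons_of_mem _ hi')) hInv1
    refine ⟨by rw [← heq1]; exact heq2, hInv2, ?_, ?_⟩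
    · intro a b ha ha' hb hb' hnz
      exact (hpres2 a b ha ha' hb hb'
        (by rw [hpres1 a b ha ha' hb hb' hnz]; exact hnz)).trans
        (hpres1 a b ha ha' hb hb' hnz)
    · intro i' hi' b hb hb'
      rcases List.mem_cons.mp hi' with rfl | hi'
      · have hm : pvGet2 ((PySem.List.pyRange 0 (land.length : Int) 1).foldl
            (fun s j => if pvGet2 s.1 i' j = 0 then
              (BFS land height s.1 (i', j) s.2 (land.length : Int), s.2 + 1) else s) s).1 i' b ≠ 0 := by
          apply hmark1
          rw [PySem.List.mem_pyRange_one]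
          exact ⟨hb, hb'⟩
        exact fun hc => hm (((hpres2 i' b hi0 hi1 hb hb' hm).symm).trans hc)
      · exact hmark2 i' hi' b hb hb'

theorem pvFoldInvCongrMem {α β : Type} (l : List β) (f g : α → β → α) (Inv : α → Prop)
    (hfg : ∀ a d, d ∈ l → Inv a → f a d = g a d)
    (hInv : ∀ a d, d ∈ l → Inv a → Inv (f a d)) :
    ∀ a, Inv a → l.foldl f a = l.foldl g a ∧ Inv (l.foldl f a) := by
  induction l with
  | nil => intro a ha; exact ⟨rfl, ha⟩
  | cons d t ih =>
    intro a ha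
    have h1 := hfg a d List.mem_cons_self ha
    have h2 := hInv a d List.mem_cons_self ha
    simp only [List.foldl_cons]
    rw [← h1]
    exact ih (fun a' d' hd' => hfg a' d' (List.mem_cons_of_mem _ hd'))
      (fun a' d' hd' => hInv a' d' (List.mem_cons_of_mem _ hd')) (f a d) h2

theorem pvInsert_self {κ ν : Type} [BEq κ] [LawfulBEq κ] (d : PySem.Dict κ ν) (k : κ) (v : ν)
    (h : d.get? k = some v) (hnd : d.keys.Nodup) : d.insert k v = d := by
  apply PySem.Dict.ext
  rw [PySem.Dict.items_insert_of_contains _ _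
    (by rw [PySem.Dict.contains_eq_isSome_get?, h]; rfl)]
  have hcong : ∀ p ∈ d.items, (if (p.1 == k) = true then (k, v) else p) = p := by
    intro p hp
    by_cases hk : (p.1 == k) = true
    · rw [if_pos hk]
      have hk' : p.1 = k := by simpa using hk
      have hget : d.get? p.1 = some p.2 := PySem.Dict.get?_of_mem_items d (by simpa using hp) hnd
      rw [hk', h] at hget
      have hv : v = p.2 := by simpa using hget
      rw [← hk', hv]
    · rw [if_neg hk]
  calc List.map (fun p => if (p.1 == k) = true then (k, v) else p) d.items
      = List.map id d.items := List.map_congr_left hcong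
    _ = d.items := List.map_id d.items

def pvLadInv (group : Int) (lad : PySem.Dict (Int × Int) Int) : Prop :=
  lad.keys.Nodup ∧ ∀ p ∈ lad.items,
    1 ≤ p.1.1 ∧ p.1.1 < group ∧ 1 ≤ p.1.2 ∧ p.1.2 < group ∧ p.1.1 ≠ p.1.2

theorem pvLadStep_eq (check land : List (List Int)) (n : Nat) (i j : Int)
    (lad : PySem.Dict (Int × Int) Int) (hnd : lad.keys.Nodup) (d : Int × Int) :
    ladderStep check land (n : Int) i j (pvGet2 check i j) lad d =
      bestStepB check land (n : Int) i j (pvGet2 check i j) lad d := by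
  unfold ladderStep bestStepB
  by_cases h1 : i + d.1 < 0 ∨ (n : Int) ≤ i + d.1 ∨ j + d.2 < 0 ∨ (n : Int) ≤ j + d.2 ∨
      pvGet2 check (i + d.1) (j + d.2) = pvGet2 check i j
  · rw [if_pos h1, if_neg (by
      rintro ⟨c1, c2, c3, c4, c5⟩
      rcases h1 with h | h | h | h | h
      · omega
      · omega
      · omega
      · omega
      · exact c5 h)]
  · have h1' : 0 ≤ i + d.1 ∧ i + d.1 < (n : Int) ∧ 0 ≤ j + d.2 ∧ j + d.2 < (n : Int) ∧
        pvGet2 check (i + d.1) (j + d.2) ≠ pvGet2 check i j := by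
      by_cases hz : pvGet2 check (i + d.1) (j + d.2) = pvGet2 check i j
      · exact absurd (Or.inr (Or.inr (Or.inr (Or.inr hz)))) h1
      · exact ⟨by omega, by omega, by omega, by omega, hz⟩
    rw [if_neg h1, if_pos h1']
    cases hg : lad.get? (pvGet2 check i j, pvGet2 check (i + d.1) (j + d.2)) with
    | none => simp only [hg]
    | some v =>
      simp only [hg]
      by_cases hlt : |pvGet2 land i j - pvGet2 land (i + d.1) (j + d.2)| < v
      · rw [if_pos hlt, if_pos (by omega)]
      · rw [if_neg hlt]
        have hmin : (if |pvGet2 land i j - pvGet2 land (i + d.1) (j + d.2)| ≤ v then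
            |pvGet2 land i j - pvGet2 land (i + d.1) (j + d.2)| else v) = v := by
          by_cases he : |pvGet2 land i j - pvGet2 land (i + d.1) (j + d.2)| ≤ v
          · rw [if_pos he]; omega
          · rw [if_neg he]
        rw [hmin]
        exact pvInsert_self lad _ v hg hnd

theorem pvLadStep_inv (check land : List (List Int)) (n : Nat) (group : Int) (i j : Int)
    (hvals : ∀ a b : Int, 0 ≤ a → a < (n : Int) → 0 ≤ b → b < (n : Int) →
      1 ≤ pvGet2 check a b ∧ pvGet2 check a b < group)
    (hij : 0 ≤ i ∧ i < (n : Int) ∧ 0 ≤ j ∧ j < (n : Int))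
    (lad : PySem.Dict (Int × Int) Int) (hInv : pvLadInv group lad) (d : Int × Int) :
    pvLadInv group (ladderStep check land (n : Int) i j (pvGet2 check i j) lad d) := by
  obtain ⟨hnd, hmem⟩ := hInv
  unfold ladderStep
  by_cases h1 : i + d.1 < 0 ∨ (n : Int) ≤ i + d.1 ∨ j + d.2 < 0 ∨ (n : Int) ≤ j + d.2 ∨
      pvGet2 check (i + d.1) (j + d.2) = pvGet2 check i j
  · rw [if_pos h1]; exact ⟨hnd, hmem⟩
  · rw [if_neg h1]
    have hb : 0 ≤ i + d.1 ∧ i + d.1 < (n : Int) ∧ 0 ≤ j + d.2 ∧ j + d.2 < (n : Int) ∧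
        pvGet2 check (i + d.1) (j + d.2) ≠ pvGet2 check i j := by
      by_cases hz : pvGet2 check (i + d.1) (j + d.2) = pvGet2 check i j
      · exact absurd (Or.inr (Or.inr (Or.inr (Or.inr hz)))) h1
      · exact ⟨by omega, by omega, by omega, by omega, hz⟩
    have hcur := hvals i j hij.1 hij.2.1 hij.2.2.1 hij.2.2.2
    have hoth := hvals (i + d.1) (j + d.2) (by omega) (by omega) (by omega) (by omega)
    have hkey : ∀ w : Int, pvLadInv group
        (lad.insert (pvGet2 check i j, pvGet2 check (i + d.1) (j + d.2)) w) := by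
      intro w
      refine ⟨PySem.Dict.nodup_keys_insert _ _ _ hnd, ?_⟩
      intro p hp
      rcases (PySem.Dict.mem_items_insert _ _ _ _).mp hp with rfl | ⟨hp', _⟩
      · exact ⟨hcur.1, hcur.2, hoth.1, hoth.2, fun hc => hb.2.2.2.2 hc.symm⟩
      · exact hmem p hp'
    cases hg : lad.get? (pvGet2 check i j, pvGet2 check (i + d.1) (j + d.2)) with
    | none => simp only [hg]; exact hkey _
    | some v => simp only [hg]; exact hkey _

theorem pvPhase2 (check land : List (List Int)) (n : Nat) (group : Int)
    (hvals : ∀ a b : Int, 0 ≤ a → a < (n : Int) → 0 ≤ b → b < (n : Int) →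
      1 ≤ pvGet2 check a b ∧ pvGet2 check a b < group) :
    findLadder check land (n : Int) =
      (PySem.List.pyRange 0 (n : Int) 1).foldl (fun b i =>
        (PySem.List.pyRange 0 (n : Int) 1).foldl (fun b j =>
          [((0 : Int), (-1 : Int)), (0, 1), (1, 0), (-1, 0)].foldl
            (bestStepB check land (n : Int) i j (pvGet2 check i j)) b) b)
        PySem.Dict.empty ∧
    pvLadInv group (findLadder check land (n : Int)) := by
  have hdirs : ∀ (i j : Int), 0 ≤ i → i < (n : Int) → 0 ≤ j → j < (n : Int) →
      ∀ lad, pvLadInv group lad →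
      ([((0 : Int), (-1 : Int)), (0, 1), (1, 0), (-1, 0)].foldl
          (ladderStep check land (n : Int) i j (pvGet2 check i j)) lad) =
        ([((0 : Int), (-1 : Int)), (0, 1), (1, 0), (-1, 0)].foldl
          (bestStepB check land (n : Int) i j (pvGet2 check i j)) lad) ∧
      pvLadInv group ([((0 : Int), (-1 : Int)), (0, 1), (1, 0), (-1, 0)].foldl
          (ladderStep check land (n : Int) i j (pvGet2 check i j)) lad) := by
    intro i j hi hi' hj hj' lad hInv
    exact pvFoldInvCongrMem _ _ _ (pvLadInv group)
      (fun a d _ ha => pvLadStep_eq check land n i j a ha.1 d)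
      (fun a d _ ha => pvLadStep_inv check land n group i j hvals ⟨hi, hi', hj, hj'⟩ a ha d)
      lad hInv
  have hrow : ∀ (i : Int), 0 ≤ i → i < (n : Int) → ∀ lad, pvLadInv group lad →
      ((PySem.List.pyRange 0 (n : Int) 1).foldl (fun lad j =>
        [((0 : Int), (-1 : Int)), (0, 1), (1, 0), (-1, 0)].foldl
          (ladderStep check land (n : Int) i j (pvGet2 check i j)) lad) lad) =
      ((PySem.List.pyRange 0 (n : Int) 1).foldl (fun lad j =>
        [((0 : Int), (-1 : Int)), (0, 1), (1, 0), (-1, 0)].foldl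
          (bestStepB check land (n : Int) i j (pvGet2 check i j)) lad) lad) ∧
      pvLadInv group ((PySem.List.pyRange 0 (n : Int) 1).foldl (fun lad j =>
        [((0 : Int), (-1 : Int)), (0, 1), (1, 0), (-1, 0)].foldl
          (ladderStep check land (n : Int) i j (pvGet2 check i j)) lad) lad) := by
    intro i hi hi' lad hInv
    exact pvFoldInvCongrMem _ _ _ (pvLadInv group)
      (fun a d hd ha => (hdirs i d hi hi'
        ((PySem.List.mem_pyRange_one).mp hd).1 ((PySem.List.mem_pyRange_one).mp hd).2 a ha).1)
      (fun a d hd ha => (hdirs i d hi hi'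
        ((PySem.List.mem_pyRange_one).mp hd).1 ((PySem.List.mem_pyRange_one).mp hd).2 a ha).2)
      lad hInv
  have hgrid := pvFoldInvCongrMem (PySem.List.pyRange 0 (n : Int) 1)
    (fun lad i => (PySem.List.pyRange 0 (n : Int) 1).foldl (fun lad j =>
      [((0 : Int), (-1 : Int)), (0, 1), (1, 0), (-1, 0)].foldl
        (ladderStep check land (n : Int) i j (pvGet2 check i j)) lad) lad)
    (fun lad i => (PySem.List.pyRange 0 (n : Int) 1).foldl (fun lad j =>
      [((0 : Int), (-1 : Int)), (0, 1), (1, 0), (-1, 0)].foldl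
        (bestStepB check land (n : Int) i j (pvGet2 check i j)) lad) lad)
    (pvLadInv group)
    (fun a d hd ha => (hrow d ((PySem.List.mem_pyRange_one).mp hd).1
      ((PySem.List.mem_pyRange_one).mp hd).2 a ha).1)
    (fun a d hd ha => (hrow d ((PySem.List.mem_pyRange_one).mp hd).1
      ((PySem.List.mem_pyRange_one).mp hd).2 a ha).2)
    PySem.Dict.empty
    (⟨by simp [PySem.Dict.empty], by simp [PySem.Dict.empty]⟩)
  exact ⟨hgrid.1, hgrid.2⟩

theorem pvZeroRow_getD (L : List Int) (k : Nat) :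
    ((L.map (fun _ => (0 : Int))).getD k 0) = 0 := by
  rcases Nat.lt_or_ge k L.length with h | h
  · rw [List.getD_eq_getElem _ _ (by simpa using h)]
    simp
  · rw [List.getD_eq_default _ _ (by simpa using h)]

theorem pvCheck0_spec (n : Nat) :
    pvWF n ((PySem.List.pyRange 0 (n : Int) 1).map
      (fun _ => (PySem.List.pyRange 0 (n : Int) 1).map (fun _ => (0 : Int)))) ∧
    (∀ a b : Int, 0 ≤ a → a < (n : Int) → 0 ≤ b → b < (n : Int) →
      pvGet2 ((PySem.List.pyRange 0 (n : Int) 1).map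
        (fun _ => (PySem.List.pyRange 0 (n : Int) 1).map (fun _ => (0 : Int)))) a b = 0) := by
  have hlen : ((PySem.List.pyRange 0 (n : Int) 1).map
      (fun _ => (PySem.List.pyRange 0 (n : Int) 1).map (fun _ => (0 : Int)))).length = n := by
    rw [List.length_map, PySem.List.length_pyRange_one]
    omega
  have hWF : pvWF n ((PySem.List.pyRange 0 (n : Int) 1).map
      (fun _ => (PySem.List.pyRange 0 (n : Int) 1).map (fun _ => (0 : Int)))) := by
    refine ⟨hlen, ?_⟩
    intro row hrow
    obtain ⟨x, _, rfl⟩ := List.mem_map.mp hrow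
    rw [List.length_map, PySem.List.length_pyRange_one]
    omega
  refine ⟨hWF, ?_⟩
  intro a b ha ha' hb hb'
  rw [pvGet2_elem _ n hWF a b ha ha' hb]
  have hrow : ((PySem.List.pyRange 0 (n : Int) 1).map
      (fun _ => (PySem.List.pyRange 0 (n : Int) 1).map (fun _ => (0 : Int))))[a.toNat]'(by
        rw [hlen]; omega) = (PySem.List.pyRange 0 (n : Int) 1).map (fun _ => (0 : Int)) := by
    rw [List.getElem_map]
  rw [hrow, pvZeroRow_getD]

theorem pvMkSelf_items (L : List Int) (hnd : L.Nodup) :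
    (L.foldl (fun d g => d.insert g g) PySem.Dict.empty).items = L.map (fun a => (a, a)) := by
  have h := PySem.Dict.items_foldl_insert_fresh L (fun a => a) (fun a => a) PySem.Dict.empty
    (fun a _ => by simp) (by simpa using hnd)
  simpa using h

theorem pvMkSelf_keys (L : List Int) (hnd : L.Nodup) :
    (L.foldl (fun d g => d.insert g g) PySem.Dict.empty).keys = L := by
  simp only [PySem.Dict.keys, pvMkSelf_items L hnd, List.map_map]
  show List.map (fun a : Int => a) L = L
  exact List.map_id' L

theorem pvMkSelf_get? (L : List Int) (hnd : L.Nodup) (z : Int) (hz : z ∈ L) :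
    (L.foldl (fun d g => d.insert g g) PySem.Dict.empty).get? z = some z := by
  apply PySem.Dict.get?_of_mem_items
  · rw [pvMkSelf_items L hnd]
    exact List.mem_map.mpr ⟨z, hz, rfl⟩
  · rw [pvMkSelf_keys L hnd]; exact hnd

theorem pvMkSelf_get?_none (L : List Int) (hnd : L.Nodup) (z : Int) (hz : z ∉ L) :
    (L.foldl (fun d g => d.insert g g) PySem.Dict.empty).get? z = none := by
  rw [PySem.Dict.get?_eq_none_iff_not_mem_keys, pvMkSelf_keys L hnd]
  exact hz

-- pure (non-compressing) chase of find_root's parent chain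
def pvFind : Nat → PySem.Dict Int Int → Int → Option Int
  | 0, _, _ => none
  | f + 1, d, x =>
    match d.get? x with
    | none => none
    | some p => if p = x then some x else pvFind f d p

theorem pvFind_mono {f : Nat} {d : PySem.Dict Int Int} {x r : Int}
    (h : pvFind f d x = some r) : ∀ f', f ≤ f' → pvFind f' d x = some r := by
  induction f generalizing x with
  | zero => simp [pvFind] at h
  | succ f ih =>
    intro f' hf'
    obtain ⟨f'', rfl⟩ : ∃ g, f' = g + 1 := ⟨f' - 1, by omega⟩
    cases hg : d.get? x with
    | none => simp [pvFind, hg] at h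
    | some p =>
      simp only [pvFind, hg] at h ⊢
      by_cases hpx : p = x
      · simpa [hpx] using h
      · rw [if_neg hpx] at h ⊢
        exact ih h f'' (by omega)

theorem pvFind_unique {f f' : Nat} {d : PySem.Dict Int Int} {x r r' : Int}
    (h : pvFind f d x = some r) (h' : pvFind f' d x = some r') : r = r' := by
  have h1 := pvFind_mono h (max f f') (by omega)
  have h2 := pvFind_mono h' (max f f') (by omega)
  rw [h1] at h2
  exact (Option.some.injEq _ _ ▸ h2 : r = r')

theorem pvFind_fix {f : Nat} {d : PySem.Dict Int Int} {x r : Int}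
    (h : pvFind f d x = some r) : d.get? r = some r := by
  induction f generalizing x with
  | zero => simp [pvFind] at h
  | succ f ih =>
    cases hg : d.get? x with
    | none => simp [pvFind, hg] at h
    | some p =>
      simp only [pvFind, hg] at h
      by_cases hpx : p = x
      · rw [if_pos hpx] at h
        obtain rfl : x = r := by simpa using h
        rw [hg, hpx]
      · rw [if_neg hpx] at h
        exact ih h

-- path compression (insert x ↦ its root) preserves every pvFind value at the SAME fuel
theorem pvFind_insert_root {h : Nat} {d : PySem.Dict Int Int} {x r : Int}
    (hx : pvFind h d x = some r) :
    ∀ g z w, pvFind g d z = some w → pvFind g (d.insert x r) z = some w := by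
  intro g
  induction g with
  | zero => intro z w hw; simp [pvFind] at hw
  | succ g ih =>
    intro z w hw
    cases hg : d.get? z with
    | none => simp [pvFind, hg] at hw
    | some p =>
      simp only [pvFind, hg] at hw
      by_cases hpz : p = z
      · rw [if_pos hpz] at hw
        obtain rfl : z = w := by simpa using hw
        by_cases hzx : z = x
        · subst hzx
          have : r = z := pvFind_unique hx (show pvFind (h+1) d z = some z by
            simp only [pvFind, hg, if_pos hpz])
          subst this
          simp [pvFind, PySem.Dict.get?_insert_self]
        · simp [pvFind, PySem.Dict.get?_insert_of_ne _ _ hzx, hg, hpz]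
      · rw [if_neg hpz] at hw
        by_cases hzx : z = x
        · subst hzx
          have hwr : w = r := pvFind_unique (show pvFind (g+1) d z = some w by
            simp only [pvFind, hg, if_neg hpz]; exact hw) hx
          subst hwr
          have hrz : w ≠ z := by
            intro hc; subst hc
            have h2 : d.get? w = some w := pvFind_fix hx
            rw [hg] at h2
            exact hpz (by simpa using h2)
          simp only [pvFind, PySem.Dict.get?_insert_self, if_neg (show ¬ (w = z) from hrz)]
          -- need pvFind g (insert z w) w = some w ; w is a fixpoint, g ≥ 1
          obtain ⟨g', rfl⟩ : ∃ g', g = g' + 1 := by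
            cases g with
            | zero => simp [pvFind] at hw
            | succ g' => exact ⟨g', rfl⟩
          have hfix : d.get? w = some w := pvFind_fix hx
          simp [pvFind, PySem.Dict.get?_insert_of_ne _ _ hrz, hfix]
        · simp only [pvFind, PySem.Dict.get?_insert_of_ne _ _ hzx, hg, if_neg hpz]
          exact ih p w hw

theorem findRoot_spec {f : Nat} :
    ∀ {d : PySem.Dict Int Int} {x r : Int}, d.keys.Nodup → pvFind f d x = some r →
    ∀ F, f ≤ F →
      (findRoot F x d).1 = r ∧
      (∀ g z w, pvFind g d z = some w → pvFind g (findRoot F x d).2 z = some w) ∧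
      (∀ z, ((findRoot F x d).2.get? z).isSome = (d.get? z).isSome) ∧
      (findRoot F x d).2.items.length = d.items.length ∧
      (findRoot F x d).2.keys.Nodup := by
  induction f with
  | zero => intro d x r _ hx; simp [pvFind] at hx
  | succ f ih =>
    intro d x r hnd hx F hF
    obtain ⟨F', rfl⟩ : ∃ G, F = G + 1 := ⟨F - 1, by omega⟩
    cases hg : d.get? x with
    | none => simp [pvFind, hg] at hx
    | some p =>
      simp only [pvFind, hg] at hx
      by_cases hpx : p = x
      · rw [if_pos hpx] at hx
        obtain rfl : x = r := by simpa using hx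
        have : findRoot (F' + 1) x d = (x, d) := by
          simp only [findRoot, hg, if_pos hpx.symm]
        rw [this]
        exact ⟨rfl, fun g z w hw => hw, fun z => rfl, rfl, hnd⟩
      · rw [if_neg hpx] at hx
        have hfr : findRoot (F' + 1) x d =
            ((findRoot F' p d).1, (findRoot F' p d).2.insert x (findRoot F' p d).1) := by
          simp only [findRoot, hg, if_neg (fun hc : x = p => hpx hc.symm)]
        obtain ⟨h1, h2, h3, h4, h5⟩ := ih hnd hx F' (by omega)
        rw [hfr]
        refine ⟨h1, ?_, ?_, ?_, PySem.Dict.nodup_keys_insert _ _ _ h5⟩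
        · intro g z w hw
          have hx1 : pvFind (f + 1) (findRoot F' p d).2 x = some r := by
            apply h2
            simp only [pvFind, hg, if_neg hpx]
            exact hx
          rw [h1]
          exact pvFind_insert_root hx1 g z w (h2 g z w hw)
        · intro z
          by_cases hzx : z = x
          · subst hzx
            rw [PySem.Dict.get?_insert_self, hg]
            rfl
          · rw [PySem.Dict.get?_insert_of_ne _ _ hzx]
            exact h3 z
        · have hcont : (findRoot F' p d).2.contains x = true := by
            rw [PySem.Dict.contains_eq_isSome_get?, h3, hg]
            rfl
          rw [PySem.Dict.items_insert_of_contains _ _ hcont, List.length_map]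
          exact h4

theorem pvFind_insert_newroot {d : PySem.Dict Int Int} {xr yr : Int}
    (hxr : d.get? xr = some xr) (hyr : d.get? yr = some yr) (hne : yr ≠ xr) :
    ∀ (h : Nat) (z w : Int), pvFind h d z = some w →
      pvFind (h + 1) (d.insert yr xr) z = some (if w = yr then xr else w) := by
  intro h
  induction h with
  | zero => intro z w hw; simp [pvFind] at hw
  | succ h ih =>
    intro z w hw
    cases hg : d.get? z with
    | none => simp [pvFind, hg] at hw
    | some p =>
      simp only [pvFind, hg] at hw
      by_cases hpz : p = z
      · rw [if_pos hpz] at hw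
        obtain rfl : z = w := by simpa using hw
        by_cases hzy : z = yr
        · subst hzy
          rw [if_pos rfl]
          have hne' : xr ≠ z := fun hc => hne hc.symm
          simp only [pvFind, PySem.Dict.get?_insert_self, if_neg hne']
          simp [PySem.Dict.get?_insert_of_ne _ _ hne', hxr]
        · rw [if_neg hzy]
          have hg' : d.get? z = some z := by rw [hg, hpz]
          simp [pvFind, PySem.Dict.get?_insert_of_ne _ _ hzy, hg']
      · rw [if_neg hpz] at hw
        have hzy : z ≠ yr := by
          intro hc; subst hc
          rw [hyr] at hg
          have : z = p := by simpa using hg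
          exact hpz this.symm
        simp only [pvFind, PySem.Dict.get?_insert_of_ne _ _ hzy, hg, if_neg hpz]
        exact ih p w hw

theorem get?_mk_map_values (f : Int → Int) :
    ∀ (l : List (Int × Int)) (z r : Int),
      (PySem.Dict.mk l).get? z = some r →
      (PySem.Dict.mk (l.map (fun p => (p.1, f p.2)))).get? z = some (f r) := by
  intro l
  induction l with
  | nil =>
    intro z r h
    rw [show (PySem.Dict.mk ([] : List (Int × Int))) = PySem.Dict.empty from rfl,
      PySem.Dict.get?_empty] at h
    cases h
  | cons kv rest ih =>
    intro z r h
    rw [PySem.Dict.get?_mk_cons] at h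
    simp only [List.map_cons]
    rw [PySem.Dict.get?_mk_cons]
    by_cases hk : (kv.1 == z) = true
    · rw [if_pos hk] at h
      obtain rfl : kv.2 = r := by simpa using h
      rw [if_pos hk]
    · rw [if_neg hk] at h
      rw [if_neg hk]
      exact ih z r h

def pvBStep (s : Int × PySem.Dict Int Int) (e : (Int × Int) × Int) : Int × PySem.Dict Int Int :=
  let cx := (s.2.get? e.1.1).getD 0
  let cy := (s.2.get? e.1.2).getD 0
  if cx ≠ cy then
    (s.1 + e.2, PySem.Dict.mk (s.2.items.map (fun p => if p.2 = cy then (p.1, cx) else p)))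
  else s

theorem kruskalLoopB_eq_foldl (es : List ((Int × Int) × Int)) (comp : PySem.Dict Int Int) :
    kruskalLoopB es comp = (es.foldl pvBStep (0, comp)).1 := rfl

def pvKInv (L : List Int) (h : Nat) (dA dB : PySem.Dict Int Int) : Prop :=
  dA.keys.Nodup ∧ dA.items.length = L.length ∧
  (∀ z, (dA.get? z).isSome = true ↔ z ∈ L) ∧
  (∀ z ∈ L, ∃ r, pvFind h dA z = some r ∧ dB.get? z = some r)

theorem pvBStall (l : Int) :
    ∀ (es : List ((Int × Int) × Int)) (s : Int) (dB : PySem.Dict Int Int),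
      (∀ e ∈ es, e.1.1 ∈ ([l] : List Int) ∧ e.1.2 ∈ ([l] : List Int)) →
      (es.foldl pvBStep (s, dB)).1 = s := by
  intro es
  induction es with
  | nil => intro s dB _; rfl
  | cons e rest ih =>
    intro s dB hes
    obtain ⟨h1, h2⟩ := hes e (List.mem_cons_self)
    simp only [List.mem_singleton] at h1 h2
    have : pvBStep (s, dB) e = (s, dB) := by
      unfold pvBStep
      rw [h1, h2]
      simp
    rw [List.foldl_cons, this]
    exact ih s dB (fun e' he' => hes e' (List.mem_cons_of_mem _ he'))

theorem kruskal_loop_eq (L : List Int) :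
    ∀ (es : List ((Int × Int) × Int)) (h F : Nat) (dA dB : PySem.Dict Int Int) (s : Int),
      pvKInv L h dA dB →
      (∀ e ∈ es, e.1.1 ∈ L ∧ e.1.2 ∈ L) →
      h + es.length ≤ F →
      kruskalLoop F es dA s = (es.foldl pvBStep (s, dB)).1 := by
  intro es
  induction es with
  | nil => intro h F dA dB s _ _ _; rfl
  | cons e rest ih =>
    intro h F dA dB s hInv hes hF
    obtain ⟨hnd, hlen, hsome, hroots⟩ := hInv
    obtain ⟨hx, hy⟩ := hes e (List.mem_cons_self)
    obtain ⟨rx, hrx, hbx⟩ := hroots e.1.1 hx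
    obtain ⟨ry0, hry0, hby⟩ := hroots e.1.2 hy
    -- A: first find
    obtain ⟨ha1, ha2, ha3, ha4, ha5⟩ := findRoot_spec hnd hrx F (by omega)
    set dA1 := (findRoot F e.1.1 dA).2 with hdA1
    -- invariant transported to dA1
    have hroots1 : ∀ z ∈ L, ∃ r, pvFind h dA1 z = some r ∧ dB.get? z = some r := by
      intro z hz
      obtain ⟨r, h1, h2⟩ := hroots z hz
      exact ⟨r, ha2 h z r h1, h2⟩
    have hsome1 : ∀ z, (dA1.get? z).isSome = true ↔ z ∈ L := fun z => by rw [ha3 z]; exact hsome z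
    -- A: second find
    obtain ⟨r1, hr1, hb1⟩ := hroots1 e.1.2 hy
    obtain ⟨hb1', hb2', hb3', hb4', hb5'⟩ := findRoot_spec ha5 hr1 F (by omega)
    set dA2 := (findRoot F e.1.2 dA1).2 with hdA2
    have hroots2 : ∀ z ∈ L, ∃ r, pvFind h dA2 z = some r ∧ dB.get? z = some r := by
      intro z hz
      obtain ⟨r, h1, h2⟩ := hroots1 z hz
      exact ⟨r, hb2' h z r h1, h2⟩
    have hsome2 : ∀ z, (dA2.get? z).isSome = true ↔ z ∈ L := fun z => by rw [hb3' z]; exact hsome1 z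
    have hlen2 : dA2.items.length = L.length := by rw [hb4', ha4, hlen]
    have hr1eq : r1 = ry0 := pvFind_unique hr1 (ha2 h _ _ hry0)
    -- B step values
    have hcx : ((dB.get? e.1.1).getD 0) = rx := by rw [hbx]; rfl
    have hcy : ((dB.get? e.1.2).getD 0) = ry0 := by rw [hby]; rfl
    show kruskalLoop F (e :: rest) dA s = _
    rw [List.foldl_cons]
    obtain ⟨⟨x, y⟩, v⟩ := e
    simp only at hx hy hbx hby hcx hcy hrx hry0 hr1 ha1 hb1 hb1'
    rw [kruskalLoop]
    simp only [← hdA1, ← hdA2, ha1, hb1', hr1eq]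
    by_cases hne : rx ≠ ry0
    · rw [if_pos hne]
      -- B takes the branch too
      have hBbranch : pvBStep (s, dB) ((x, y), v) = (s + v,
          PySem.Dict.mk (dB.items.map (fun p => if p.2 = ry0 then (p.1, rx) else p))) := by
        unfold pvBStep
        simp only [hcx, hcy]
        rw [if_pos hne]
      rw [hBbranch]
      -- A union
      obtain ⟨hc1, hc2, hc3, hc4, hc5⟩ := findRoot_spec hb5' (hb2' h _ _ (ha2 h _ _ hrx)) F (by omega)
      set dA3 := (findRoot F x dA2).2 with hdA3
      have hr2 : pvFind h dA2 y = some ry0 := hb2' h _ _ (ha2 h _ _ hry0)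
      obtain ⟨hd1, hd2, hd3, hd4, hd5⟩ := findRoot_spec hc5 (hc2 h _ _ hr2) F (by omega)
      set dA4 := (findRoot F y dA3).2 with hdA4
      have hUF : unionFind F x y dA2 = dA4.insert ry0 rx := by
        simp only [unionFind]
        rw [← hdA3, ← hdA4, hc1, hd1]
      rw [hUF]
      -- new invariant at h + 1
      have hfixx : dA4.get? rx = some rx :=
        pvFind_fix (hd2 h _ _ (hc2 h _ _ (hb2' h _ _ (ha2 h _ _ hrx))))
      have hfixy : dA4.get? ry0 = some ry0 :=
        pvFind_fix (hd2 h _ _ (hc2 h _ _ hr2))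
      have hne2 : ry0 ≠ rx := fun hc => hne (hc ▸ rfl)
      have hroots5 : ∀ z ∈ L, ∃ r, pvFind (h + 1) (dA4.insert ry0 rx) z = some r ∧
          (PySem.Dict.mk (dB.items.map (fun p => if p.2 = ry0 then (p.1, rx) else p))).get? z = some r := by
        intro z hz
        obtain ⟨r, h1, h2⟩ := hroots2 z hz
        have h1' := hd2 h _ _ (hc2 h _ _ h1)
        refine ⟨if r = ry0 then rx else r, pvFind_insert_newroot hfixx hfixy hne2 h z r h1', ?_⟩
        have : (fun p : Int × Int => if p.2 = ry0 then (p.1, rx) else p) =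
            (fun p : Int × Int => (p.1, if p.2 = ry0 then rx else p.2)) := by
          funext p; by_cases hp : p.2 = ry0 <;> simp [hp]
        rw [this]
        have h2' : (PySem.Dict.mk dB.items).get? z = some r := h2
        have := get?_mk_map_values (fun w => if w = ry0 then rx else w) dB.items z r h2'
        simpa using this
      -- length of the new A dict
      have hcont : dA4.contains ry0 = true := by
        rw [PySem.Dict.contains_eq_isSome_get?, hfixy]; rfl
      have hlen5 : (dA4.insert ry0 rx).items.length = L.length := by
        rw [PySem.Dict.items_insert_of_contains _ _ hcont, List.length_map, hd4, hc4, hlen2]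
      have hsome5 : ∀ z, ((dA4.insert ry0 rx).get? z).isSome = true ↔ z ∈ L := by
        intro z
        by_cases hz : z = ry0
        · subst hz
          rw [PySem.Dict.get?_insert_self]
          simp only [Option.isSome_some]
          constructor
          · intro _
            apply (hsome2 z).mp
            have h9 : (dA4.get? z).isSome = true := by rw [hfixy]; rfl
            rw [hd3, hc3] at h9
            exact h9
          · intro _; trivial
        · rw [PySem.Dict.get?_insert_of_ne _ _ hz, hd3, hc3]
          exact hsome2 z
      -- early-exit test: impossible here unless L is a singleton, which contradicts rx ≠ r2
      have hnot1 : ¬ ((dA4.insert ry0 rx).items.length = 1) ∨ L.length = 1 := by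
        by_cases hL : L.length = 1
        · right; exact hL
        · left; rw [hlen5]; exact hL
      rcases hnot1 with hnot1 | hL1
      · rw [if_neg hnot1]
        exact ih (h + 1) F (dA4.insert ry0 rx) _ (s + v)
          ⟨PySem.Dict.nodup_keys_insert _ _ _ hd5, hlen5, hsome5, hroots5⟩
          (fun e' he' => hes e' (List.mem_cons_of_mem _ he'))
          (by simp at hF ⊢; omega)
      · -- L = [l]: x = y, so rx = ry0 — contradiction with hne
        exfalso
        obtain ⟨l, hl⟩ := List.length_eq_one_iff.mp hL1
        subst hl
        simp only [List.mem_singleton] at hx hy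
        subst hx; subst hy
        exact hne (pvFind_unique hrx hry0)
    · rw [if_neg hne]
      push_neg at hne
      subst hne
      have hBskip : pvBStep (s, dB) ((x, y), v) = (s, dB) := by
        unfold pvBStep
        simp only [hcx, hcy]
        simp
      rw [hBskip]
      by_cases h1 : dA2.items.length = 1
      · rw [if_pos h1]
        -- L is a singleton: the remaining B fold is a stall
        have hL1 : L.length = 1 := by rw [← hlen2, h1]
        obtain ⟨l, hl⟩ := List.length_eq_one_iff.mp hL1
        subst hl
        exact (pvBStall l rest s dB (fun e' he' =>
          (hes e' (List.mem_cons_of_mem _ he')))).symm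
      · rw [if_neg h1]
        exact ih h F dA2 dB s ⟨hb5', hlen2, hsome2, hroots2⟩
          (fun e' he' => hes e' (List.mem_cons_of_mem _ he'))
          (by simp at hF ⊢; omega)

-- ---------- glue: A's kruskal = the dict-comp fold ----------
theorem pvKruskal_eq (es : List ((Int × Int) × Int)) (group : Int)
    (hes : ∀ e ∈ es, e.1.1 ∈ PySem.List.pyRange 1 group 1 ∧
      e.1.2 ∈ PySem.List.pyRange 1 group 1) :
    kruskal es group = kruskalLoopB es
      ((PySem.List.pyRange 1 group 1).foldl (fun d g => d.insert g g) PySem.Dict.empty) := by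
  have hnd : (PySem.List.pyRange 1 group 1).Nodup := PySem.List.nodup_pyRange_one 1 group
  have hInv : pvKInv (PySem.List.pyRange 1 group 1) 1
      ((PySem.List.pyRange 1 group 1).foldl (fun d g => d.insert g g) PySem.Dict.empty)
      ((PySem.List.pyRange 1 group 1).foldl (fun d g => d.insert g g) PySem.Dict.empty) := by
    refine ⟨?_, ?_, ?_, ?_⟩
    · rw [pvMkSelf_keys _ hnd]; exact hnd
    · rw [pvMkSelf_items _ hnd, List.length_map]
    · intro z
      by_cases hz : z ∈ PySem.List.pyRange 1 group 1
      · rw [pvMkSelf_get? _ hnd z hz]; simp [hz]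
      · rw [pvMkSelf_get?_none _ hnd z hz]; simp [hz]
    · intro z hz
      refine ⟨z, ?_, pvMkSelf_get? _ hnd z hz⟩
      simp [pvFind, pvMkSelf_get? _ hnd z hz]
  unfold kruskal
  rw [kruskalLoopB_eq_foldl]
  exact kruskal_loop_eq (PySem.List.pyRange 1 group 1) es 1 _ _ _ 0 hInv hes (by
    simp only [pvMkSelf_items _ hnd, List.length_map]
    omega)


-- ---------- flat-list / matrix correspondence ----------

def pvCorr (n : Nat) (check : List (List Int)) (label : List Int) : Prop :=
  label.length = n * n ∧ ∀ i j : Int, 0 ≤ i → i < (n : Int) → 0 ≤ j → j < (n : Int) →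
    PySem.List.pyGetD label (i * (n : Int) + j) 0 = pvGet2 check i j

theorem pvEnc_bounds (n : Nat) (i j : Int) (hi : 0 ≤ i) (hi' : i < (n : Int))
    (hj : 0 ≤ j) (hj' : j < (n : Int)) :
    0 ≤ i * (n : Int) + j ∧ i * (n : Int) + j < (n : Int) * (n : Int) := by
  constructor
  · have := mul_nonneg hi (by omega : (0 : Int) ≤ (n : Int))
    omega
  · have h1 : i * (n : Int) + j < (i + 1) * (n : Int) := by ring_nf; omega
    have h2 : (i + 1) * (n : Int) ≤ (n : Int) * (n : Int) :=
      mul_le_mul_of_nonneg_right (by omega) (by omega)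
    omega

theorem pvEnc_inj (n : Nat) (i j i' j' : Int) (hi : 0 ≤ i) (hi' : i < (n : Int))
    (hj : 0 ≤ j) (hj' : j < (n : Int)) (hi2 : 0 ≤ i') (hi2' : i' < (n : Int))
    (hj2 : 0 ≤ j') (hj2' : j' < (n : Int))
    (h : i * (n : Int) + j = i' * (n : Int) + j') : i = i' ∧ j = j' := by
  have hii : i = i' := by
    rcases lt_trichotomy i i' with hlt | heq | hgt
    · exfalso
      have h1 : i * (n : Int) + j < (i + 1) * (n : Int) := by ring_nf; omega
      have h2 : (i + 1) * (n : Int) ≤ i' * (n : Int) :=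
        mul_le_mul_of_nonneg_right (by omega) (by omega)
      omega
    · exact heq
    · exfalso
      have h1 : i' * (n : Int) + j' < (i' + 1) * (n : Int) := by ring_nf; omega
      have h2 : (i' + 1) * (n : Int) ≤ i * (n : Int) :=
        mul_le_mul_of_nonneg_right (by omega) (by omega)
      omega
  subst hii
  exact ⟨rfl, by omega⟩

theorem pvCorr_set (n : Nat) (check : List (List Int)) (label : List Int)
    (hWF : pvWF n check) (hC : pvCorr n check label) (i j v : Int)
    (hi : 0 ≤ i) (hi' : i < (n : Int)) (hj : 0 ≤ j) (hj' : j < (n : Int)) :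
    pvCorr n (pvSet2 check i j v) (PySem.List.pySetD label (i * (n : Int) + j) v) := by
  obtain ⟨hlen, hread⟩ := hC
  obtain ⟨hk0, hk1⟩ := pvEnc_bounds n i j hi hi' hj hj'
  have hset : PySem.List.pySetD label (i * (n : Int) + j) v =
      label.set (i * (n : Int) + j).toNat v :=
    PySem.List.pySetD_of_nonneg _ _ hk0
  constructor
  · rw [hset, List.length_set, hlen]
  · intro a b ha ha' hb hb'
    obtain ⟨hb0, hb1⟩ := pvEnc_bounds n a b ha ha' hb hb'
    rw [hset, pvGetD_int _ _ 0 hb0 (by rw [List.length_set, hlen]; push_cast; omega),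
      List.getElem_set,
      pvGet2_pvSet2 check n hWF i j v hi hi' hj hj' a b ha hb]
    by_cases hab : a = i ∧ b = j
    · obtain ⟨rfl, rfl⟩ := hab
      rw [if_pos rfl, if_pos ⟨rfl, rfl⟩]
    · rw [if_neg ?_, if_neg hab]
      · rw [← hread a b ha ha' hb hb', pvGetD_int _ _ 0 hb0 (by push_cast; omega)]
      · intro hc
        have : a * (n : Int) + b = i * (n : Int) + j := by omega
        exact hab (pvEnc_inj n a b i j ha ha' hb hb' hi hi' hj hj' this)


-- ---------- collect-then-mark = step-by-step marking (the four neighbours are distinct) ----------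

def pvCandM (land : List (List Int)) (height : Int) (n : Nat) (check : List (List Int))
    (x y : Int) (ds : List (Int × Int)) : List (Int × Int) :=
  ds.filterMap (fun d =>
    if 0 ≤ x + d.1 ∧ x + d.1 < (n : Int) ∧ 0 ≤ y + d.2 ∧ y + d.2 < (n : Int) ∧
        pvGet2 check (x + d.1) (y + d.2) = 0 ∧
        |pvGet2 land (x + d.1) (y + d.2) - pvGet2 land x y| ≤ height
    then some (x + d.1, y + d.2) else none)

theorem pvFilterMap_congr {α β : Type} (l : List α) (f g : α → Option β)
    (h : ∀ x ∈ l, f x = g x) : l.filterMap f = l.filterMap g := by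
  induction l with
  | nil => rfl
  | cons a t ih =>
    rw [List.filterMap_cons, List.filterMap_cons, h a List.mem_cons_self,
      ih (fun x hx => h x (List.mem_cons_of_mem _ hx))]

theorem pvCandM_set (land : List (List Int)) (height : Int) (n : Nat)
    (check : List (List Int)) (hWF : pvWF n check) (x y g : Int) (d : Int × Int)
    (hd1 : 0 ≤ x + d.1) (hd2 : x + d.1 < (n : Int)) (hd3 : 0 ≤ y + d.2)
    (hd4 : y + d.2 < (n : Int)) (ds : List (Int × Int)) (hne : ∀ d' ∈ ds, d ≠ d') :
    pvCandM land height n (pvSet2 check (x + d.1) (y + d.2) g) x y ds =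
      pvCandM land height n check x y ds := by
  apply pvFilterMap_congr
  intro d' hd'
  by_cases hb : 0 ≤ x + d'.1 ∧ x + d'.1 < (n : Int) ∧ 0 ≤ y + d'.2 ∧ y + d'.2 < (n : Int)
  · obtain ⟨hb1, hb2, hb3, hb4⟩ := hb
    have hread : pvGet2 (pvSet2 check (x + d.1) (y + d.2) g) (x + d'.1) (y + d'.2) =
        pvGet2 check (x + d'.1) (y + d'.2) := by
      rw [pvGet2_pvSet2 check n hWF (x + d.1) (y + d.2) g hd1 hd2 hd3 hd4
        (x + d'.1) (y + d'.2) hb1 hb3]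
      rw [if_neg ?_]
      rintro ⟨h1, h2⟩
      exact hne d' hd' (Prod.ext (by omega) (by omega)).symm
    simp only [hread]
  · rw [if_neg (by rintro ⟨h1, h2, h3, h4, _⟩; exact hb ⟨h1, h2, h3, h4⟩),
      if_neg (by rintro ⟨h1, h2, h3, h4, _⟩; exact hb ⟨h1, h2, h3, h4⟩)]

theorem pvCollectMark (land : List (List Int)) (height : Int) (n : Nat) (g x y : Int) :
    ∀ (ds : List (Int × Int)), ds.Pairwise (fun a b => a ≠ b) →
    ∀ (check : List (List Int)) (rest : List (Int × Int)), pvWF n check →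
      ds.foldl (dfsStepB land height (n : Int) g x y) (check, rest) =
        ((pvCandM land height n check x y ds).foldl (fun m c => pvSet2 m c.1 c.2 g) check,
         rest ++ pvCandM land height n check x y ds) := by
  intro ds
  induction ds with
  | nil => intro _ check rest _; simp [pvCandM]
  | cons d ds ih =>
    intro hpw check rest hWF
    obtain ⟨hne, hpw'⟩ := List.pairwise_cons.mp hpw
    by_cases hc : 0 ≤ x + d.1 ∧ x + d.1 < (n : Int) ∧ 0 ≤ y + d.2 ∧ y + d.2 < (n : Int) ∧
        pvGet2 check (x + d.1) (y + d.2) = 0 ∧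
        |pvGet2 land (x + d.1) (y + d.2) - pvGet2 land x y| ≤ height
    · obtain ⟨h1, h2, h3, h4, h5, h6⟩ := hc
      have hstep : dfsStepB land height (n : Int) g x y (check, rest) d =
          (pvSet2 check (x + d.1) (y + d.2) g, rest ++ [(x + d.1, y + d.2)]) :=
        dfsStepB_mark land height (n : Int) g x y (check, rest) d ⟨h1, h2, h3, h4, h5, h6⟩
      have hWF' : pvWF n (pvSet2 check (x + d.1) (y + d.2) g) :=
        pvWF_set check n hWF _ _ g h1 h2 h3
      have hcand : pvCandM land height n (pvSet2 check (x + d.1) (y + d.2) g) x y ds =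
          pvCandM land height n check x y ds :=
        pvCandM_set land height n check hWF x y g d h1 h2 h3 h4 ds hne
      have hcons : pvCandM land height n check x y (d :: ds) =
          (x + d.1, y + d.2) :: pvCandM land height n check x y ds := by
        unfold pvCandM
        rw [List.filterMap_cons, if_pos (⟨h1, h2, h3, h4, h5, h6⟩ :
          0 ≤ x + d.1 ∧ x + d.1 < (n : Int) ∧ 0 ≤ y + d.2 ∧ y + d.2 < (n : Int) ∧
          pvGet2 check (x + d.1) (y + d.2) = 0 ∧
          |pvGet2 land (x + d.1) (y + d.2) - pvGet2 land x y| ≤ height)]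
      rw [List.foldl_cons, hstep, ih hpw' _ _ hWF', hcand, hcons, List.foldl_cons,
        List.append_cons]
      simp
    · have hstep : dfsStepB land height (n : Int) g x y (check, rest) d = (check, rest) :=
        dfsStepB_skip land height (n : Int) g x y (check, rest) d hc
      have hcons : pvCandM land height n check x y (d :: ds) =
          pvCandM land height n check x y ds := by
        unfold pvCandM
        rw [List.filterMap_cons, if_neg hc]
      rw [List.foldl_cons, hstep, ih hpw' _ _ hWF, hcons]

theorem pvCand_eq (land : List (List Int)) (height : Int) (n : Nat)
    (check : List (List Int)) (label : List Int) (hC : pvCorr n check label) (x y : Int) :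
    bCand land height (n : Int) label x y =
      pvCandM land height n check x y [((0 : Int), (-1 : Int)), (0, 1), (1, 0), (-1, 0)] := by
  unfold bCand bDirs pvCandM
  apply pvFilterMap_congr
  intro d _
  by_cases hb : 0 ≤ x + d.1 ∧ x + d.1 < (n : Int) ∧ 0 ≤ y + d.2 ∧ y + d.2 < (n : Int)
  · obtain ⟨hb1, hb2, hb3, hb4⟩ := hb
    have hread := hC.2 (x + d.1) (y + d.2) hb1 hb2 hb3 hb4
    simp only [hread]
  · rw [if_neg (by rintro ⟨h1, h2, h3, h4, _⟩; exact hb ⟨h1, h2, h3, h4⟩),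
      if_neg (by rintro ⟨h1, h2, h3, h4, _⟩; exact hb ⟨h1, h2, h3, h4⟩)]

theorem pvCandM_inb (land : List (List Int)) (height : Int) (n : Nat)
    (check : List (List Int)) (x y : Int) (ds : List (Int × Int)) :
    ∀ c ∈ pvCandM land height n check x y ds, pvInb n c := by
  intro c hc
  obtain ⟨d, _, hd⟩ := List.mem_filterMap.mp hc
  by_cases hcond : 0 ≤ x + d.1 ∧ x + d.1 < (n : Int) ∧ 0 ≤ y + d.2 ∧ y + d.2 < (n : Int) ∧
      pvGet2 check (x + d.1) (y + d.2) = 0 ∧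
      |pvGet2 land (x + d.1) (y + d.2) - pvGet2 land x y| ≤ height
  · rw [if_pos hcond] at hd
    obtain rfl : (x + d.1, y + d.2) = c := by simpa using hd
    exact ⟨hcond.1, hcond.2.1, hcond.2.2.1, hcond.2.2.2.1⟩
  · rw [if_neg hcond] at hd
    cases hd

theorem pvMarkCorr (n : Nat) (g : Int) :
    ∀ (cs : List (Int × Int)) (check : List (List Int)) (label : List Int),
      pvWF n check → pvCorr n check label → (∀ c ∈ cs, pvInb n c) →
      pvWF n (cs.foldl (fun m c => pvSet2 m c.1 c.2 g) check) ∧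
      pvCorr n (cs.foldl (fun m c => pvSet2 m c.1 c.2 g) check)
        (bMark (n : Int) g label cs) := by
  intro cs
  induction cs with
  | nil => intro check label hWF hC _; exact ⟨hWF, hC⟩
  | cons c cs ih =>
    intro check label hWF hC hinb
    obtain ⟨h1, h2, h3, h4⟩ := hinb c List.mem_cons_self
    have hWF' : pvWF n (pvSet2 check c.1 c.2 g) := pvWF_set check n hWF c.1 c.2 g h1 h2 h3
    have hC' : pvCorr n (pvSet2 check c.1 c.2 g)
        (PySem.List.pySetD label (c.1 * (n : Int) + c.2) g) :=
      pvCorr_set n check label hWF hC c.1 c.2 g h1 h2 h3 h4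
    have := ih (pvSet2 check c.1 c.2 g) (PySem.List.pySetD label (c.1 * (n : Int) + c.2) g)
      hWF' hC' (fun c' hc' => hinb c' (List.mem_cons_of_mem _ hc'))
    exact ⟨this.1, this.2⟩

theorem pvDfsCorr (land : List (List Int)) (height : Int) (n : Nat) (g : Int) :
    ∀ (fuel : Nat) (check : List (List Int)) (label : List Int) (stack : List (Int × Int)),
      pvWF n check → pvCorr n check label →
      pvWF n (dfsLoopB land height (n : Int) g fuel check stack) ∧
      pvCorr n (dfsLoopB land height (n : Int) g fuel check stack)
        (bDfs land height (n : Int) g fuel label stack) := by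
  intro fuel
  induction fuel with
  | zero => intro check label stack hWF hC; exact ⟨hWF, hC⟩
  | succ fuel ih =>
    intro check label stack hWF hC
    cases hL : stack.getLast? with
    | none =>
      simp only [dfsLoopB, bDfs, hL]
      exact ⟨hWF, hC⟩
    | some c =>
      have hpw : ([((0 : Int), (-1 : Int)), (0, 1), (1, 0), (-1, 0)] :
          List (Int × Int)).Pairwise (fun a b => a ≠ b) := by decide
      have hcm := pvCollectMark land height n g c.1 c.2
        [((0 : Int), (-1 : Int)), (0, 1), (1, 0), (-1, 0)] hpw check stack.dropLast hWF
      have hcand := pvCand_eq land height n check label hC c.1 c.2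
      set cs := pvCandM land height n check c.1 c.2
        [((0 : Int), (-1 : Int)), (0, 1), (1, 0), (-1, 0)] with hcs
      have hmk := pvMarkCorr n g cs check label hWF hC
        (pvCandM_inb land height n check c.1 c.2 _)
      have hA : dfsLoopB land height (n : Int) g (fuel + 1) check stack =
          dfsLoopB land height (n : Int) g fuel
            (cs.foldl (fun m c => pvSet2 m c.1 c.2 g) check) (stack.dropLast ++ cs) := by
        simp only [dfsLoopB, hL]
        rw [hcm]
      have hB : bDfs land height (n : Int) g (fuel + 1) label stack =
          bDfs land height (n : Int) g fuel (bMark (n : Int) g label cs)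
            (stack.dropLast ++ cs) := by
        simp only [bDfs, hL]
        rw [hcand]
      rw [hA, hB]
      exact ih _ _ _ hmk.1 hmk.2


-- ---------- one flat scan over k = i*n+j equals the nested (i, j) scan ----------

theorem pvFoldFlatMap {α β γ : Type} (l : List β) (g : β → List γ) (f : α → γ → α) :
    ∀ init, (l.flatMap g).foldl f init = l.foldl (fun s b => (g b).foldl f s) init := by
  induction l with
  | nil => intro init; rfl
  | cons b t ih =>
    intro init
    rw [List.flatMap_cons, List.foldl_append, List.foldl_cons, ih]

theorem pvRangeMul (n : Nat) : ∀ m : Nat, List.range (m * n) =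
    (List.range m).flatMap (fun i => (List.range n).map (fun j => i * n + j)) := by
  intro m
  induction m with
  | zero => simp
  | succ m ih =>
    rw [Nat.succ_mul, List.range_add, ih, List.range_succ, List.flatMap_append]
    simp

theorem pvFoldSquare {α : Type} (n : Nat) (f : α → Int → Int → α) (s0 : α) :
    (PySem.List.pyRange 0 ((n : Int) * (n : Int)) 1).foldl
        (fun s k => f s (PySem.Int.floordiv k (n : Int)) (PySem.Int.mod k (n : Int))) s0 =
      (PySem.List.pyRange 0 (n : Int) 1).foldl (fun s i =>
        (PySem.List.pyRange 0 (n : Int) 1).foldl (fun s j => f s i j) s) s0 := by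
  rw [PySem.List.pyRange_one, PySem.List.pyRange_one]
  have hM : (((n : Int) * (n : Int)) - 0).toNat = n * n := by
    rw [Int.sub_zero, ← Nat.cast_mul, Int.toNat_natCast]
  have hN : (((n : Int)) - 0).toNat = n := by omega
  rw [hM, hN, List.foldl_map, List.foldl_map, pvRangeMul n n, pvFoldFlatMap]
  apply PySem.List.foldl_congr_mem
  intro acc i _
  rw [List.foldl_map, List.foldl_map]
  apply PySem.List.foldl_congr_mem
  intro acc' j hj
  have hjn : j < n := List.mem_range.mp hj
  have hn : 0 < n := by omega
  have hd : PySem.Int.floordiv ((0 : Int) + ((i * n + j : Nat) : Int)) (n : Int) =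
      (0 : Int) + (i : Int) := by
    rw [zero_add, PySem.Int.floordiv_natCast, Nat.mul_comm i n, Nat.mul_add_div hn,
      Nat.div_eq_of_lt hjn]
    simp
  have hm : PySem.Int.mod ((0 : Int) + ((i * n + j : Nat) : Int)) (n : Int) =
      (0 : Int) + (j : Int) := by
    rw [zero_add, PySem.Int.mod_natCast, Nat.mul_comm i n, Nat.mul_add_mod, Nat.mod_eq_of_lt hjn]
    simp
  rw [hd, hm]

-- the fold state relation transport
theorem pvFoldRel {α β ι : Type} (R : α → β → Prop) (f : α → ι → α) (g : β → ι → β)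
    (l : List ι) (h : ∀ a b i, i ∈ l → R a b → R (f a i) (g b i)) :
    ∀ a b, R a b → R (l.foldl f a) (l.foldl g b) := by
  induction l with
  | nil => intro a b hR; exact hR
  | cons i t ih =>
    intro a b hR
    exact ih (fun a' b' i' hi' => h a' b' i' (List.mem_cons_of_mem _ hi'))
      (f a i) (g b i) (h a b i List.mem_cons_self hR)

-- the matrix-state phase-1 fold (pvGrid_eq's right-hand side)
def pvPD (land : List (List Int)) (height : Int) : List (List Int) × Int :=
  (PySem.List.pyRange 0 (land.length : Int) 1).foldl (fun s i =>
    (PySem.List.pyRange 0 (land.length : Int) 1).foldl (fun s j =>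
      if pvGet2 s.1 i j = 0 then
        (dfsLoopB land height (land.length : Int) s.2 (land.length * land.length + 1)
          (pvSet2 s.1 i j s.2) [(i, j)], s.2 + 1) else s) s)
  ((PySem.List.pyRange 0 (land.length : Int) 1).map
    (fun _ => (PySem.List.pyRange 0 (land.length : Int) 1).map (fun _ => (0 : Int))), 1)

theorem pvPhase1Corr (land : List (List Int)) (height : Int) :
    pvWF land.length (pvPD land height).1 ∧
    pvCorr land.length (pvPD land height).1 (bLabelGrid land height (land.length : Int)).1 ∧
    (pvPD land height).2 = (bLabelGrid land height (land.length : Int)).2 + 1 := by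
  -- rewrite bLabelGrid to the nested (i, j) fold
  have hB : bLabelGrid land height (land.length : Int) =
      (PySem.List.pyRange 0 (land.length : Int) 1).foldl (fun s i =>
        (PySem.List.pyRange 0 (land.length : Int) 1).foldl (fun s j =>
          if PySem.List.pyGetD s.1 (i * (land.length : Int) + j) 0 = 0 then
            (bDfs land height (land.length : Int) (s.2 + 1)
              ((land.length : Int).toNat * (land.length : Int).toNat + 1)
              (PySem.List.pySetD s.1 (i * (land.length : Int) + j) (s.2 + 1)) [(i, j)], s.2 + 1)
          else s) s)
      ((PySem.List.pyRange 0 ((land.length : Int) * (land.length : Int)) 1).map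
        (fun _ => (0 : Int)), 0) := by
    unfold bLabelGrid
    have h1 := PySem.List.foldl_congr_mem
      (PySem.List.pyRange 0 ((land.length : Int) * (land.length : Int)) 1)
      (fun (s : List Int × Int) k =>
        if PySem.List.pyGetD s.1 k 0 = 0 then
          (bDfs land height (land.length : Int) (s.2 + 1)
            ((land.length : Int).toNat * (land.length : Int).toNat + 1)
            (PySem.List.pySetD s.1 k (s.2 + 1))
            [(PySem.Int.floordiv k (land.length : Int),
              PySem.Int.mod k (land.length : Int))], s.2 + 1)
        else s)
      (fun (s : List Int × Int) k =>
        (fun (s : List Int × Int) (i j : Int) =>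
          if PySem.List.pyGetD s.1 (i * (land.length : Int) + j) 0 = 0 then
            (bDfs land height (land.length : Int) (s.2 + 1)
              ((land.length : Int).toNat * (land.length : Int).toNat + 1)
              (PySem.List.pySetD s.1 (i * (land.length : Int) + j) (s.2 + 1)) [(i, j)], s.2 + 1)
          else s) s (PySem.Int.floordiv k (land.length : Int))
            (PySem.Int.mod k (land.length : Int)))
      ((PySem.List.pyRange 0 ((land.length : Int) * (land.length : Int)) 1).map
        (fun _ => (0 : Int)), 0)
      (by
        intro acc k _
        have hrec : PySem.Int.floordiv k (land.length : Int) * (land.length : Int) +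
            PySem.Int.mod k (land.length : Int) = k :=
          PySem.Int.floordiv_mul_add_mod k (land.length : Int)
        simp only [hrec])
    exact h1.trans (pvFoldSquare land.length
      (fun (s : List Int × Int) (i j : Int) =>
        if PySem.List.pyGetD s.1 (i * (land.length : Int) + j) 0 = 0 then
          (bDfs land height (land.length : Int) (s.2 + 1)
            ((land.length : Int).toNat * (land.length : Int).toNat + 1)
            (PySem.List.pySetD s.1 (i * (land.length : Int) + j) (s.2 + 1)) [(i, j)], s.2 + 1)
        else s) _)
  rw [hB]
  unfold pvPD
  have hinit := pvCheck0_spec land.length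
  refine pvFoldRel
    (fun (s : List (List Int) × Int) (t : List Int × Int) =>
      pvWF land.length s.1 ∧ pvCorr land.length s.1 t.1 ∧ s.2 = t.2 + 1)
    _ _ (PySem.List.pyRange 0 (land.length : Int) 1)
    (by
      intro a b i hi hR
      obtain ⟨hi0, hi1⟩ := PySem.List.mem_pyRange_one.mp hi
      refine pvFoldRel
        (fun (s : List (List Int) × Int) (t : List Int × Int) =>
          pvWF land.length s.1 ∧ pvCorr land.length s.1 t.1 ∧ s.2 = t.2 + 1)
        _ _ (PySem.List.pyRange 0 (land.length : Int) 1)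
        (by
          intro s t j hj hR'
          obtain ⟨hj0, hj1⟩ := PySem.List.mem_pyRange_one.mp hj
          obtain ⟨s1, s2⟩ := s
          obtain ⟨t1, t2⟩ := t
          obtain ⟨hWF, hC, hcnt⟩ := hR'
          simp only at hWF hC hcnt ⊢
          subst hcnt
          have hguard : PySem.List.pyGetD t1 (i * (land.length : Int) + j) 0 =
              pvGet2 s1 i j := hC.2 i j hi0 hi1 hj0 hj1
          by_cases h0 : pvGet2 s1 i j = 0
          · rw [if_pos h0, if_pos (by rw [hguard]; exact h0)]
            have hseedC : pvCorr land.length (pvSet2 s1 i j (t2 + 1))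
                (PySem.List.pySetD t1 (i * (land.length : Int) + j) (t2 + 1)) :=
              pvCorr_set land.length s1 t1 hWF hC i j (t2 + 1) hi0 hi1 hj0 hj1
            have hseedW : pvWF land.length (pvSet2 s1 i j (t2 + 1)) :=
              pvWF_set s1 land.length hWF i j (t2 + 1) hi0 hi1 hj0
            have hdfs := pvDfsCorr land height land.length (t2 + 1)
              (land.length * land.length + 1) (pvSet2 s1 i j (t2 + 1))
              (PySem.List.pySetD t1 (i * (land.length : Int) + j) (t2 + 1)) [(i, j)]
              hseedW hseedC
            have hfuel : (land.length : Int).toNat * (land.length : Int).toNat + 1 =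
                land.length * land.length + 1 := by simp
            refine ⟨hdfs.1, ?_, by omega⟩
            rw [hfuel]
            exact hdfs.2
          · rw [if_neg h0, if_neg (by rw [hguard]; exact h0)]
            exact ⟨hWF, hC, rfl⟩)
        a b hR)
    _ _ ?_
  refine ⟨hinit.1, ⟨?_, ?_⟩, rfl⟩
  · rw [List.length_map, PySem.List.length_pyRange_one, Int.sub_zero, ← Nat.cast_mul,
      Int.toNat_natCast]
  · intro i j hi hi' hj hj'
    obtain ⟨hb0, hb1⟩ := pvEnc_bounds land.length i j hi hi' hj hj'
    rw [PySem.List.pyGetD_map_pyRange_of_nonneg _ _ _ _ hb0 hb1, hinit.2 i j hi hi' hj hj']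


-- ---------- phase 2: the per-cell edge comprehension = A-shaped per-direction dict updates ----------

theorem pvCellEdges (check land : List (List Int)) (n : Nat) (i j : Int) :
    ∀ (ds : List (Int × Int)) (best : PySem.Dict (Int × Int) Int),
      ds.foldl (bestStepB check land (n : Int) i j (pvGet2 check i j)) best =
        (ds.filterMap (fun d =>
          if 0 ≤ i + d.1 ∧ i + d.1 < (n : Int) ∧ 0 ≤ j + d.2 ∧ j + d.2 < (n : Int) ∧
              pvGet2 check (i + d.1) (j + d.2) ≠ pvGet2 check i j
          then some ((pvGet2 check i j, pvGet2 check (i + d.1) (j + d.2)),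
                     |pvGet2 land i j - pvGet2 land (i + d.1) (j + d.2)|)
          else none)).foldl bUpd best := by
  intro ds
  induction ds with
  | nil => intro best; rfl
  | cons d ds ih =>
    intro best
    rw [List.foldl_cons, List.filterMap_cons]
    by_cases hc : 0 ≤ i + d.1 ∧ i + d.1 < (n : Int) ∧ 0 ≤ j + d.2 ∧ j + d.2 < (n : Int) ∧
        pvGet2 check (i + d.1) (j + d.2) ≠ pvGet2 check i j
    · rw [if_pos hc]
      have hstep : bestStepB check land (n : Int) i j (pvGet2 check i j) best d =
          bUpd best ((pvGet2 check i j, pvGet2 check (i + d.1) (j + d.2)),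
            |pvGet2 land i j - pvGet2 land (i + d.1) (j + d.2)|) := by
        unfold bestStepB bUpd
        rw [if_pos hc]
      rw [hstep, ih]
      rfl
    · rw [if_neg hc]
      have hstep : bestStepB check land (n : Int) i j (pvGet2 check i j) best d = best := by
        unfold bestStepB
        rw [if_neg hc]
      rw [hstep, ih]

theorem pvEdges_eq (check land : List (List Int)) (n : Nat) (label : List Int)
    (hC : pvCorr n check label) (i j : Int) (hi : 0 ≤ i) (hi' : i < (n : Int))
    (hj : 0 ≤ j) (hj' : j < (n : Int)) :
    bEdges land (n : Int) label (PySem.List.pyGetD label (i * (n : Int) + j) 0) i j =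
      [((0 : Int), (-1 : Int)), (0, 1), (1, 0), (-1, 0)].filterMap (fun d =>
        if 0 ≤ i + d.1 ∧ i + d.1 < (n : Int) ∧ 0 ≤ j + d.2 ∧ j + d.2 < (n : Int) ∧
            pvGet2 check (i + d.1) (j + d.2) ≠ pvGet2 check i j
        then some ((pvGet2 check i j, pvGet2 check (i + d.1) (j + d.2)),
                   |pvGet2 land i j - pvGet2 land (i + d.1) (j + d.2)|)
        else none) := by
  unfold bEdges bDirs
  have hg : PySem.List.pyGetD label (i * (n : Int) + j) 0 = pvGet2 check i j :=
    hC.2 i j hi hi' hj hj'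
  apply pvFilterMap_congr
  intro d _
  by_cases hb : 0 ≤ i + d.1 ∧ i + d.1 < (n : Int) ∧ 0 ≤ j + d.2 ∧ j + d.2 < (n : Int)
  · obtain ⟨hb1, hb2, hb3, hb4⟩ := hb
    have hread := hC.2 (i + d.1) (j + d.2) hb1 hb2 hb3 hb4
    simp only [hg, hread]
  · rw [if_neg (by rintro ⟨h1, h2, h3, h4, _⟩; exact hb ⟨h1, h2, h3, h4⟩),
      if_neg (by rintro ⟨h1, h2, h3, h4, _⟩; exact hb ⟨h1, h2, h3, h4⟩)]

theorem pvPhase2Corr (check land : List (List Int)) (n : Nat) (label : List Int)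
    (hC : pvCorr n check label) :
    bBest land (n : Int) label =
      (PySem.List.pyRange 0 (n : Int) 1).foldl (fun b i =>
        (PySem.List.pyRange 0 (n : Int) 1).foldl (fun b j =>
          [((0 : Int), (-1 : Int)), (0, 1), (1, 0), (-1, 0)].foldl
            (bestStepB check land (n : Int) i j (pvGet2 check i j)) b) b)
        PySem.Dict.empty := by
  unfold bBest
  have h1 := PySem.List.foldl_congr_mem
    (PySem.List.pyRange 0 ((n : Int) * (n : Int)) 1)
    (fun (best : PySem.Dict (Int × Int) Int) k =>
      (bEdges land (n : Int) label (PySem.List.pyGetD label k 0)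
        (PySem.Int.floordiv k (n : Int)) (PySem.Int.mod k (n : Int))).foldl bUpd best)
    (fun (best : PySem.Dict (Int × Int) Int) k =>
      (fun (best : PySem.Dict (Int × Int) Int) (i j : Int) =>
        (bEdges land (n : Int) label (PySem.List.pyGetD label (i * (n : Int) + j) 0) i j).foldl
          bUpd best) best (PySem.Int.floordiv k (n : Int)) (PySem.Int.mod k (n : Int)))
    PySem.Dict.empty
    (by
      intro acc k _
      have hrec : PySem.Int.floordiv k (n : Int) * (n : Int) + PySem.Int.mod k (n : Int) = k :=
        PySem.Int.floordiv_mul_add_mod k (n : Int)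
      simp only [hrec])
  rw [h1, pvFoldSquare n
    (fun (best : PySem.Dict (Int × Int) Int) (i j : Int) =>
      (bEdges land (n : Int) label (PySem.List.pyGetD label (i * (n : Int) + j) 0) i j).foldl
        bUpd best) PySem.Dict.empty]
  apply PySem.List.foldl_congr_mem
  intro acc i hi
  obtain ⟨hi0, hi1⟩ := PySem.List.mem_pyRange_one.mp hi
  apply PySem.List.foldl_congr_mem
  intro acc' j hj
  obtain ⟨hj0, hj1⟩ := PySem.List.mem_pyRange_one.mp hj
  rw [pvEdges_eq check land n label hC i j hi0 hi1 hj0 hj1, ← pvCellEdges]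

-- ---------- phase 3: dict-comp Kruskal = flat-list-comp Kruskal ----------

theorem pvGetD_map_at (f : Int → Int) (l : List Int) (z : Int) (h0 : 0 ≤ z)
    (h1 : z < (l.length : Int)) :
    PySem.List.pyGetD (l.map f) z 0 = f (PySem.List.pyGetD l z 0) := by
  rw [pvGetD_int _ z 0 h0 (by simpa using h1), pvGetD_int l z 0 h0 h1, List.getElem_map]

theorem pvGetD_pyRange0 (m z : Int) (h0 : 0 ≤ z) (h1 : z < m) :
    PySem.List.pyGetD (PySem.List.pyRange 0 m 1) z 0 = z := by
  rw [pvGetD_int _ z 0 h0 (by rw [PySem.List.length_pyRange_one]; omega),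
    PySem.List.getElem_pyRange_one]
  omega

theorem pvKruskalList (group : Int) (hg : 1 ≤ group) (es : List ((Int × Int) × Int))
    (hes : ∀ e ∈ es, e.1.1 ∈ PySem.List.pyRange 1 group 1 ∧
      e.1.2 ∈ PySem.List.pyRange 1 group 1) :
    kruskalLoopB es
      ((PySem.List.pyRange 1 group 1).foldl (fun d g => d.insert g g) PySem.Dict.empty) =
      bKruskal es (group - 1) := by
  have hnd : (PySem.List.pyRange 1 group 1).Nodup := PySem.List.nodup_pyRange_one 1 group
  unfold bKruskal
  rw [show group - 1 + 1 = group by ring, kruskalLoopB_eq_foldl]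
  have hR := pvFoldRel
    (fun (s : Int × PySem.Dict Int Int) (t : Int × List Int) =>
      s.1 = t.1 ∧ (t.2.length : Int) = group ∧ PySem.List.pyGetD t.2 0 0 = 0 ∧
      ∀ z : Int, 1 ≤ z → z < group →
        s.2.get? z = some (PySem.List.pyGetD t.2 z 0) ∧ 1 ≤ PySem.List.pyGetD t.2 z 0)
    pvBStep
    (fun (s : Int × List Int) e =>
      let ca := PySem.List.pyGetD s.2 e.1.1 0
      let cb := PySem.List.pyGetD s.2 e.1.2 0
      if ca ≠ cb then (s.1 + e.2, s.2.map (fun c => if c = cb then ca else c)) else s)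
    es
    (by
      intro s t e he hR
      obtain ⟨hsum, hlen, h00, hvals⟩ := hR
      obtain ⟨hea, heb⟩ := hes e he
      obtain ⟨ha1, ha2⟩ := PySem.List.mem_pyRange_one.mp hea
      obtain ⟨hb1, hb2⟩ := PySem.List.mem_pyRange_one.mp heb
      obtain ⟨hga, hga1⟩ := hvals e.1.1 ha1 ha2
      obtain ⟨hgb, hgb1⟩ := hvals e.1.2 hb1 hb2
      have hcx : (s.2.get? e.1.1).getD 0 = PySem.List.pyGetD t.2 e.1.1 0 := by rw [hga]; rfl
      have hcy : (s.2.get? e.1.2).getD 0 = PySem.List.pyGetD t.2 e.1.2 0 := by rw [hgb]; rfl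
      set ca := PySem.List.pyGetD t.2 e.1.1 0 with hca
      set cb := PySem.List.pyGetD t.2 e.1.2 0 with hcb
      by_cases hne : ca ≠ cb
      · have hA : pvBStep s e = (s.1 + e.2,
            PySem.Dict.mk (s.2.items.map (fun p => if p.2 = cb then (p.1, ca) else p))) := by
          unfold pvBStep
          rw [hcx, hcy, if_pos hne]
        have hB : (fun (s : Int × List Int) e =>
            let ca' := PySem.List.pyGetD s.2 e.1.1 0
            let cb' := PySem.List.pyGetD s.2 e.1.2 0
            if ca' ≠ cb' then (s.1 + e.2, s.2.map (fun c => if c = cb' then ca' else c)) else s)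
            t e = (t.1 + e.2, t.2.map (fun c => if c = cb then ca else c)) := by
          simp only
          rw [if_pos hne]
        rw [hA, hB]
        refine ⟨by simp [hsum], by simpa using hlen, ?_, ?_⟩
        · rw [pvGetD_map_at _ _ 0 le_rfl (by omega), h00, if_neg (by omega)]
        · intro z hz1 hz2
          obtain ⟨hgz, hgz1⟩ := hvals z hz1 hz2
          have hmapfn : (fun p : Int × Int => if p.2 = cb then (p.1, ca) else p) =
              (fun p : Int × Int => (p.1, if p.2 = cb then ca else p.2)) := by
            funext p; by_cases hp : p.2 = cb <;> simp [hp]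
          have hdict : (PySem.Dict.mk (s.2.items.map
              (fun p => if p.2 = cb then (p.1, ca) else p))).get? z =
              some (if PySem.List.pyGetD t.2 z 0 = cb then ca else PySem.List.pyGetD t.2 z 0) := by
            rw [hmapfn]
            have h2' : (PySem.Dict.mk s.2.items).get? z =
                some (PySem.List.pyGetD t.2 z 0) := hgz
            have := get?_mk_map_values (fun w => if w = cb then ca else w) s.2.items z _ h2'
            simpa using this
          have hlist : PySem.List.pyGetD (t.2.map (fun c => if c = cb then ca else c)) z 0 =
              (if PySem.List.pyGetD t.2 z 0 = cb then ca else PySem.List.pyGetD t.2 z 0) := by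
            rw [pvGetD_map_at _ _ z (by omega) (by omega)]
          refine ⟨?_, ?_⟩
          · rw [hdict, hlist]
          · rw [hlist]
            by_cases hzz : PySem.List.pyGetD t.2 z 0 = cb
            · rw [if_pos hzz]; exact hga1
            · rw [if_neg hzz]; exact hgz1
      · have hA : pvBStep s e = s := by
          unfold pvBStep
          rw [hcx, hcy, if_neg hne]
        have hB : (fun (s : Int × List Int) e =>
            let ca' := PySem.List.pyGetD s.2 e.1.1 0
            let cb' := PySem.List.pyGetD s.2 e.1.2 0
            if ca' ≠ cb' then (s.1 + e.2, s.2.map (fun c => if c = cb' then ca' else c)) else s)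
            t e = t := by
          simp only
          rw [if_neg hne]
        rw [hA, hB]
        exact ⟨hsum, hlen, h00, hvals⟩)
    ((0 : Int), (PySem.List.pyRange 1 group 1).foldl (fun d g => d.insert g g) PySem.Dict.empty)
    ((0 : Int), PySem.List.pyRange 0 group 1)
    (by
      refine ⟨rfl, ?_, ?_, ?_⟩
      · rw [PySem.List.length_pyRange_one]; omega
      · exact pvGetD_pyRange0 group 0 le_rfl (by omega)
      · intro z hz1 hz2
        rw [pvGetD_pyRange0 group z (by omega) hz2]
        exact ⟨pvMkSelf_get? _ hnd z (PySem.List.mem_pyRange_one.mpr ⟨hz1, hz2⟩), hz1⟩)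
  exact hR.1

-- ===== VERDICT (by name: the statement is the Claim_ definition above) =====
theorem solution_spec : Claim_equal_solution := by
  intro land height _ _
  unfold Spec_solution solution solution_alt
  simp only []
  obtain ⟨hWF0, hzero⟩ := pvCheck0_spec land.length
  have hInv0 : pvCellInv land.length
      ((PySem.List.pyRange 0 (land.length : Int) 1).map
        (fun _ => (PySem.List.pyRange 0 (land.length : Int) 1).map (fun _ => (0 : Int))), 1) :=
    ⟨hWF0, le_refl 1, fun a b ha ha' hb hb' => Or.inl (hzero a b ha ha' hb hb')⟩
  obtain ⟨hpeq, hpInv, hpres, hmark⟩ :=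
    pvGrid_eq land height (PySem.List.pyRange 0 (land.length : Int) 1)
      ((PySem.List.pyRange 0 (land.length : Int) 1).map
        (fun _ => (PySem.List.pyRange 0 (land.length : Int) 1).map (fun _ => (0 : Int))), 1)
      (fun i hi => (PySem.List.mem_pyRange_one).mp hi) hInv0
  rw [hpeq] at hpInv hmark ⊢
  have hPDeq : (PySem.List.pyRange 0 (land.length : Int) 1).foldl
      (fun s i => (PySem.List.pyRange 0 (land.length : Int) 1).foldl
        (fun s j => if pvGet2 s.1 i j = 0 then
          (dfsLoopB land height (land.length : Int) s.2 (land.length * land.length + 1)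
            (pvSet2 s.1 i j s.2) [(i, j)], s.2 + 1) else s) s)
      ((PySem.List.pyRange 0 (land.length : Int) 1).map
        (fun _ => (PySem.List.pyRange 0 (land.length : Int) 1).map (fun _ => (0 : Int))), 1) =
      pvPD land height := rfl
  rw [hPDeq] at hpInv hmark ⊢
  obtain ⟨hWFP, hCorr, hcnt⟩ := pvPhase1Corr land height
  have hcells : ∀ a b : Int, 0 ≤ a → a < (land.length : Int) → 0 ≤ b →
      b < (land.length : Int) →
      1 ≤ pvGet2 (pvPD land height).1 a b ∧ pvGet2 (pvPD land height).1 a b < (pvPD land height).2 := by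
    intro a b ha ha' hb hb'
    rcases hpInv.2.2 a b ha ha' hb hb' with h | h
    · exact absurd h (hmark a ((PySem.List.mem_pyRange_one).mpr ⟨ha, ha'⟩) b hb hb')
    · exact h
  obtain ⟨hladeq, hladInv⟩ := pvPhase2 (pvPD land height).1 land land.length
    (pvPD land height).2 hcells
  have hBB : bBest land (land.length : Int) (bLabelGrid land height (land.length : Int)).1 =
      findLadder (pvPD land height).1 land (land.length : Int) :=
    (pvPhase2Corr (pvPD land height).1 land land.length
      (bLabelGrid land height (land.length : Int)).1 hCorr).trans hladeq.symm
  rw [hBB]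
  have hes : ∀ e ∈ PySem.List.sorted (findLadder (pvPD land height).1 land
      (land.length : Int)).items (fun e => e.2) false,
      e.1.1 ∈ PySem.List.pyRange 1 (pvPD land height).2 1 ∧
      e.1.2 ∈ PySem.List.pyRange 1 (pvPD land height).2 1 := by
    intro e he
    have hmem : e ∈ (findLadder (pvPD land height).1 land (land.length : Int)).items :=
      ((PySem.List.sorted_perm _ _ _).mem_iff).mp he
    have hb := hladInv.2 e hmem
    exact ⟨(PySem.List.mem_pyRange_one).mpr ⟨hb.1, hb.2.1⟩,
      (PySem.List.mem_pyRange_one).mpr ⟨hb.2.2.1, hb.2.2.2.1⟩⟩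
  rw [pvKruskal_eq _ _ hes, pvKruskalList (pvPD land height).2 hpInv.2.1 _ hes]
  have hgrp : (pvPD land height).2 - 1 = (bLabelGrid land height (land.length : Int)).2 := by
    omega
  rw [hgrp]
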